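-- pv_equiv track=rewrite | github.com/Haruray/tugas-tbfo | finite_automata.py | reserved_word_check
-- ===== SOURCE A (Python) =====
-- def reserved_word_check(var_name):
--     """
--     Fungsi FA pengecekan apakah nama variable termasuk ke reserved words atau tidak
--     return true kalau variable tidak termasuk reserved words (variable yang diperbolehkan)
--     return false kalau masuk ke reserved words
--     """
--     state = 0
--     accept = 99
--     reject = 100
--     meet_null = False
--     accepting = {accept}
--     # reserved words yg dimasukkan : if, in, is, import, False, True, def, return, None, continue, for, class, from, while, and, not, with, as, elif, else, or, pass,
--     # break, raise
--     transitions = {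
--         0 : {'i' : 1, 'F' : 6, 'd': 10, 'r' : 12, 'N': 17, 'c':20, 'f': 27, 'T': 29, 'w' : 37, 'a' : 41, 'n' : 43, 'a' : 47, 'e' : 48, 'o': 51, 'p' : 52, 'b' : 55, 'r' : 59},
--         1 : {'f' : accept, 'n': accept, 'm' : 2, 's': accept},
--         2 : {'p' : 3},
--         3 : {'o' : 4},
--         4 : {'r' : 5},
--         5 : {'t' : accept},
--         6 : {'a' : 7},
--         7 : {'l' : 8},
--         8 : {'s' : 9},
--         9 : {'e' : accept},
--         10 : {'e' : 11},
--         11 : {'f': accept},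
--         12 : {'e' : 13},
--         13 : {'t' : 14},
--         14 : {'u' : 15},
--         15 : {'r' : 16},
--         16 : {'n' : accept},
--         17 : {'o' : 18},
--         18 : {'n' : 19},
--         19 : {'e' : accept},
--         20 : {'o' : 21, 'l' :32},
--         21 : {'n' : 22},
--         22 : {'t' : 23},
--         23 : {'i' : 24},
--         24 : {'n' : 25},
--         25 : {'u' : 26},
--         26 : {'e' : accept},
--         27 : {'o' : 28, 'r' : 35},
--         28 : {'r' : accept},
--         29 : {'r' : 30},
--         30 : {'u' : 31},
--         31 : {'e' : accept},
--         32 : {'a' : 33},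
--         33 : {'s' : 34},
--         34 : {'s': accept},
--         35 : {'o' : 36},
--         36 : {'m' : accept},
--         37 : {'h' : 38, 'i' : 45},
--         38 : {'i' : 39},
--         39 : {'l' : 40},
--         40 : {'e' : accept},
--         41 : {'n' : 42},
--         42 : {'d' : accept},
--         43 : {'o' : 44},
--         44 : {'t' : accept},
--         45 : {'t' : 46},
--         46 : {'h' : accept},
--         47 : {'s' : accept},
--         48 : {'l' : 49},
--         49 : {'i' : 1, 's' : 50},
--         50 : {'e' : accept},
--         51 : {'r' : accept},
--         52 : {'a' : 53},
--         53 : {'s' : 54},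
--         54 : {'s' : accept},
--         55 : {'r' : 56},
--         56 : {'e' : 57},
--         57 : {'a' : 58},
--         58 : {'k' : accept},
--         59 : {'a' : 60},
--         60 : {'i' : 61},
--         61 : {'s' : 62},
--         62 : {'e' : accept},
--
--         99 : {'abcdefghijklmnopqrstuvwxyzABCDEFGHIJKLMNOPQRSTUVWXYZ_1234567890' : reject},
--         100 : {'abcdefghijklmnopqrstuvwxyzABCDEFGHIJKLMNOPQRSTUVWXYZ_1234567890' : reject}
--     }
--
--     for c in var_name:
--         for key in transitions[state].keys():
--             if c in key :
--                 curr_key = key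
--                 meet_null = False
--                 break
--             else: #jika tidak (berarti ada huruf yang tidak membentuk reserved words) berarti masuk ke dead state
--                 meet_null = True
--         if ( not meet_null ):
--             state = transitions[state][curr_key]
--         else:
--             state = reject
--             meet_null = False
--
--     return not (state in accepting)
-- ===== SOURCE B (Python) =====
-- # Reserved words as a flat set lookup instead of a hand-built finite automaton.
-- # The set is the one A's own comment says it implements (includes 'and' and 'return',
-- # excludes the accidental 'elin'/'elis'/'elimport' that A's transition table produces).
-- RESERVED = frozenset({
--     "if", "in", "is", "import", "False", "True", "def", "return", "None",
--     "continue", "for", "class", "from", "while", "and", "not", "with", "as",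
--     "elif", "else", "or", "pass", "break", "raise",
-- })
--
--
-- def reserved_word_check(var_name):
--     return var_name not in RESERVED
-- ===== Notes on version B (the rewrite author's own statement) =====
-- stated objective: simpler
-- what changed: Replaces the char-by-char finite-automaton walk over a 66-state transition dict with a single membership test against a frozenset of the reserved words the automaton was meant to encode (no per-character inner scan over the row's keys).
-- intended difference: On exactly {'and','return','elin','elis','elimport'} A returns the wrong verdict (True i.e. allowed for the real keywords 'and' and 'return', whose state-0 transitions are clobbered by duplicate dict keys 'a' and 'r'; False i.e. reserved for the non-words 'elin','elis','elimport' created by the stray 49->1 transition), while B returns the verdict for the keyword set A's own comment lists, which is the intended behaviour. — e.g. on reserved_word_check("and"): A returns true, B returns false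
import Mathlib
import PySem

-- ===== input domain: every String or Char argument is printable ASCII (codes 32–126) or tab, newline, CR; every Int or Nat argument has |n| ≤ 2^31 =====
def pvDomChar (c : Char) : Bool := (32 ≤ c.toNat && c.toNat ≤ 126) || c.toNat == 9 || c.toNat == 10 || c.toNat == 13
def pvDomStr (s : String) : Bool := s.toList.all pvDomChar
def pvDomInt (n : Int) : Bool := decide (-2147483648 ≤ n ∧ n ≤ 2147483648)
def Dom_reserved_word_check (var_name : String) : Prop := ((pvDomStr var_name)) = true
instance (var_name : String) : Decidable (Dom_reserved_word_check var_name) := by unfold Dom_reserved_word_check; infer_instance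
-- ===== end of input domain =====

set_option maxRecDepth 16384
set_option maxHeartbeats 1000000


-- B replaces A's hand-built finite-automaton walk by a single membership test against the
-- reserved-word set A's own comment lists; on {"and","return","elin","elis","elimport"} A's
-- transition table is wrong (duplicate dict keys / stray 49→1 transition) and B gives the
-- intended verdict (stated as D_ below).

-- ===== PORT A =====
-- the rows of the Python transition dict, one helper per state, each a literal transliteration
-- of the corresponding inner dict (row 0 keeps the duplicate keys 'a' and 'r' of the source;
-- PySem.Dict.ofList resolves them exactly like a Python dict literal: the later value wins and
-- the key keeps its first position)
def pvRow0 : PySem.Dict String Int := PySem.Dict.ofList [("i", 1), ("F", 6), ("d", 10), ("r", 12), ("N", 17), ("c", 20), ("f", 27), ("T", 29), ("w", 37), ("a", 41), ("n", 43), ("a", 47), ("e", 48), ("o", 51), ("p", 52), ("b", 55), ("r", 59)]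
def pvRow1 : PySem.Dict String Int := PySem.Dict.ofList [("f", 99), ("n", 99), ("m", 2), ("s", 99)]
def pvRow2 : PySem.Dict String Int := PySem.Dict.ofList [("p", 3)]
def pvRow3 : PySem.Dict String Int := PySem.Dict.ofList [("o", 4)]
def pvRow4 : PySem.Dict String Int := PySem.Dict.ofList [("r", 5)]
def pvRow5 : PySem.Dict String Int := PySem.Dict.ofList [("t", 99)]
def pvRow6 : PySem.Dict String Int := PySem.Dict.ofList [("a", 7)]
def pvRow7 : PySem.Dict String Int := PySem.Dict.ofList [("l", 8)]
def pvRow8 : PySem.Dict String Int := PySem.Dict.ofList [("s", 9)]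
def pvRow9 : PySem.Dict String Int := PySem.Dict.ofList [("e", 99)]
def pvRow10 : PySem.Dict String Int := PySem.Dict.ofList [("e", 11)]
def pvRow11 : PySem.Dict String Int := PySem.Dict.ofList [("f", 99)]
def pvRow12 : PySem.Dict String Int := PySem.Dict.ofList [("e", 13)]
def pvRow13 : PySem.Dict String Int := PySem.Dict.ofList [("t", 14)]
def pvRow14 : PySem.Dict String Int := PySem.Dict.ofList [("u", 15)]
def pvRow15 : PySem.Dict String Int := PySem.Dict.ofList [("r", 16)]
def pvRow16 : PySem.Dict String Int := PySem.Dict.ofList [("n", 99)]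
def pvRow17 : PySem.Dict String Int := PySem.Dict.ofList [("o", 18)]
def pvRow18 : PySem.Dict String Int := PySem.Dict.ofList [("n", 19)]
def pvRow19 : PySem.Dict String Int := PySem.Dict.ofList [("e", 99)]
def pvRow20 : PySem.Dict String Int := PySem.Dict.ofList [("o", 21), ("l", 32)]
def pvRow21 : PySem.Dict String Int := PySem.Dict.ofList [("n", 22)]
def pvRow22 : PySem.Dict String Int := PySem.Dict.ofList [("t", 23)]
def pvRow23 : PySem.Dict String Int := PySem.Dict.ofList [("i", 24)]
def pvRow24 : PySem.Dict String Int := PySem.Dict.ofList [("n", 25)]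
def pvRow25 : PySem.Dict String Int := PySem.Dict.ofList [("u", 26)]
def pvRow26 : PySem.Dict String Int := PySem.Dict.ofList [("e", 99)]
def pvRow27 : PySem.Dict String Int := PySem.Dict.ofList [("o", 28), ("r", 35)]
def pvRow28 : PySem.Dict String Int := PySem.Dict.ofList [("r", 99)]
def pvRow29 : PySem.Dict String Int := PySem.Dict.ofList [("r", 30)]
def pvRow30 : PySem.Dict String Int := PySem.Dict.ofList [("u", 31)]
def pvRow31 : PySem.Dict String Int := PySem.Dict.ofList [("e", 99)]
def pvRow32 : PySem.Dict String Int := PySem.Dict.ofList [("a", 33)]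
def pvRow33 : PySem.Dict String Int := PySem.Dict.ofList [("s", 34)]
def pvRow34 : PySem.Dict String Int := PySem.Dict.ofList [("s", 99)]
def pvRow35 : PySem.Dict String Int := PySem.Dict.ofList [("o", 36)]
def pvRow36 : PySem.Dict String Int := PySem.Dict.ofList [("m", 99)]
def pvRow37 : PySem.Dict String Int := PySem.Dict.ofList [("h", 38), ("i", 45)]
def pvRow38 : PySem.Dict String Int := PySem.Dict.ofList [("i", 39)]
def pvRow39 : PySem.Dict String Int := PySem.Dict.ofList [("l", 40)]
def pvRow40 : PySem.Dict String Int := PySem.Dict.ofList [("e", 99)]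
def pvRow41 : PySem.Dict String Int := PySem.Dict.ofList [("n", 42)]
def pvRow42 : PySem.Dict String Int := PySem.Dict.ofList [("d", 99)]
def pvRow43 : PySem.Dict String Int := PySem.Dict.ofList [("o", 44)]
def pvRow44 : PySem.Dict String Int := PySem.Dict.ofList [("t", 99)]
def pvRow45 : PySem.Dict String Int := PySem.Dict.ofList [("t", 46)]
def pvRow46 : PySem.Dict String Int := PySem.Dict.ofList [("h", 99)]
def pvRow47 : PySem.Dict String Int := PySem.Dict.ofList [("s", 99)]
def pvRow48 : PySem.Dict String Int := PySem.Dict.ofList [("l", 49)]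
def pvRow49 : PySem.Dict String Int := PySem.Dict.ofList [("i", 1), ("s", 50)]
def pvRow50 : PySem.Dict String Int := PySem.Dict.ofList [("e", 99)]
def pvRow51 : PySem.Dict String Int := PySem.Dict.ofList [("r", 99)]
def pvRow52 : PySem.Dict String Int := PySem.Dict.ofList [("a", 53)]
def pvRow53 : PySem.Dict String Int := PySem.Dict.ofList [("s", 54)]
def pvRow54 : PySem.Dict String Int := PySem.Dict.ofList [("s", 99)]
def pvRow55 : PySem.Dict String Int := PySem.Dict.ofList [("r", 56)]
def pvRow56 : PySem.Dict String Int := PySem.Dict.ofList [("e", 57)]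
def pvRow57 : PySem.Dict String Int := PySem.Dict.ofList [("a", 58)]
def pvRow58 : PySem.Dict String Int := PySem.Dict.ofList [("k", 99)]
def pvRow59 : PySem.Dict String Int := PySem.Dict.ofList [("a", 60)]
def pvRow60 : PySem.Dict String Int := PySem.Dict.ofList [("i", 61)]
def pvRow61 : PySem.Dict String Int := PySem.Dict.ofList [("s", 62)]
def pvRow62 : PySem.Dict String Int := PySem.Dict.ofList [("e", 99)]
def pvRow99 : PySem.Dict String Int := PySem.Dict.ofList [("abcdefghijklmnopqrstuvwxyzABCDEFGHIJKLMNOPQRSTUVWXYZ_1234567890", 100)]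
def pvRow100 : PySem.Dict String Int := PySem.Dict.ofList [("abcdefghijklmnopqrstuvwxyzABCDEFGHIJKLMNOPQRSTUVWXYZ_1234567890", 100)]

def pvTrans : PySem.Dict Int (PySem.Dict String Int) := PySem.Dict.ofList [((0 : Int), pvRow0), ((1 : Int), pvRow1), ((2 : Int), pvRow2), ((3 : Int), pvRow3), ((4 : Int), pvRow4), ((5 : Int), pvRow5), ((6 : Int), pvRow6), ((7 : Int), pvRow7), ((8 : Int), pvRow8), ((9 : Int), pvRow9), ((10 : Int), pvRow10), ((11 : Int), pvRow11), ((12 : Int), pvRow12), ((13 : Int), pvRow13), ((14 : Int), pvRow14), ((15 : Int), pvRow15), ((16 : Int), pvRow16), ((17 : Int), pvRow17), ((18 : Int), pvRow18), ((19 : Int), pvRow19), ((20 : Int), pvRow20), ((21 : Int), pvRow21), ((22 : Int), pvRow22), ((23 : Int), pvRow23), ((24 : Int), pvRow24), ((25 : Int), pvRow25), ((26 : Int), pvRow26), ((27 : Int), pvRow27), ((28 : Int), pvRow28), ((29 : Int), pvRow29), ((30 : Int), pvRow30), ((31 : Int), pvRow31), ((32 : Int), pvRow32), ((33 : Int), pvRow33),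 ((34 : Int), pvRow34), ((35 : Int), pvRow35), ((36 : Int), pvRow36), ((37 : Int), pvRow37), ((38 : Int), pvRow38), ((39 : Int), pvRow39), ((40 : Int), pvRow40), ((41 : Int), pvRow41), ((42 : Int), pvRow42), ((43 : Int), pvRow43), ((44 : Int), pvRow44), ((45 : Int), pvRow45), ((46 : Int), pvRow46), ((47 : Int), pvRow47), ((48 : Int), pvRow48), ((49 : Int), pvRow49), ((50 : Int), pvRow50), ((51 : Int), pvRow51), ((52 : Int), pvRow52), ((53 : Int), pvRow53), ((54 : Int), pvRow54), ((55 : Int), pvRow55), ((56 : Int), pvRow56), ((57 : Int), pvRow57), ((58 : Int), pvRow58), ((59 : Int), pvRow59), ((60 : Int), pvRow60), ((61 : Int), pvRow61), ((62 : Int), pvRow62), ((99 : Int), pvRow99), ((100 : Int), pvRow100)]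

-- the inner 'for key in transitions[state].keys()' loop: the first key with 'c in key' wins
-- ('c in key' for a 1-character c is exactly 'key.toList.contains c'); if no key matches
-- (meet_null stays True) the Python sets state = reject = 100
def pvInner (row : PySem.Dict String Int) (c : Char) : Int :=
  match row.keys.find? (fun k => k.toList.contains c) with
  | some k => row.getD k 100   -- state = transitions[state][curr_key]
  | none => 100                -- state = reject

-- one iteration of the outer 'for c in var_name' loop ('transitions[state]' never misses a key
-- on the states the walk reaches, so the getD default is never used)
def pvStepA (state : Int) (c : Char) : Int :=
  pvInner (pvTrans.getD state PySem.Dict.empty) c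

def reserved_word_check (var_name : String) : Bool :=
  let state := var_name.toList.foldl pvStepA 0
  !((PySem.Set.ofList [(99 : Int)]).contains state)   -- 'not (state in accepting)', accepting = {99}

-- ===== PORT B =====
def pvReserved : PySem.Set String := PySem.Set.ofList
  ["if", "in", "is", "import", "False", "True", "def", "return", "None", "continue", "for", "class", "from", "while", "and", "not", "with", "as", "elif", "else", "or", "pass", "break", "raise"]

def reserved_word_check_alt (var_name : String) : Bool := !(pvReserved.contains var_name)

-- ===== PRECONDITION & SPEC =====
-- On exactly {"and","return","elin","elis","elimport"} A returns the wrong verdict (True, i.e.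
-- allowed, for the real keywords "and" and "return", whose row-0 transitions are clobbered by the
-- duplicate dict keys 'a' and 'r'; False, i.e. reserved, for the non-words "elin"/"elis"/"elimport"
-- created by the stray 49→1 transition), while B returns the verdict for the keyword set A's own
-- comment lists, which is the intended behaviour.
def D_reserved_word_check (var_name : String) : Prop :=
  var_name = "and" ∨ var_name = "return" ∨ var_name = "elin" ∨ var_name = "elis" ∨ var_name = "elimport"
instance (var_name : String) : Decidable (D_reserved_word_check var_name) := by
  unfold D_reserved_word_check; infer_instance

def Spec_reserved_word_check (var_name : String) (out : Bool) : Prop :=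
  ¬ D_reserved_word_check var_name → out = reserved_word_check_alt var_name
instance (var_name : String) (out : Bool) : Decidable (Spec_reserved_word_check var_name out) := by
  unfold Spec_reserved_word_check; infer_instance

def pvDiffWitness_reserved_word_check : String := ("and")
def pvDiffWitnessOut_reserved_word_check : Bool × Bool := (true, false)

-- ===== CLAIM (what is proved, stated in full; the proofs are below) =====
def Claim_unchanged_reserved_word_check : Prop := ∀ (var_name : String), Dom_reserved_word_check var_name → Spec_reserved_word_check var_name (reserved_word_check var_name)
def Claim_changed_reserved_word_check : Prop := Dom_reserved_word_check (pvDiffWitness_reserved_word_check) ∧ D_reserved_word_check (pvDiffWitness_reserved_word_check) ∧ reserved_word_check (pvDiffWitness_reserved_word_check) = pvDiffWitnessOut_reserved_word_check.1 ∧ reserved_word_check_alt (pvDiffWitness_reserved_word_check) = pvDiffWitnessOut_reserved_word_check.2 ∧ pvDiffWitnessOut_reserved_word_check.1 ≠ pvDiffWitnessOut_reserved_word_check.2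
def Claim_exact_reserved_word_check : Prop := ∀ (var_name : String), Dom_reserved_word_check var_name → D_reserved_word_check var_name → reserved_word_check var_name ≠ reserved_word_check_alt var_name

-- ===== LEMMAS AND PROOFS =====

-- the states of A's table
def pvStates : List Int := [0, 1, 2, 3, 4, 5, 6, 7, 8, 9, 10, 11, 12, 13, 14, 15, 16, 17, 18, 19, 20, 21, 22, 23, 24, 25, 26, 27, 28, 29, 30, 31, 32, 33, 34, 35, 36, 37, 38, 39, 40, 41, 42, 43, 44, 45, 46, 47, 48, 49, 50, 51, 52, 53, 54, 55, 56, 57, 58, 59, 60, 61, 62, 99, 100]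

-- pvSuf s = the exact set of suffixes that drive A's automaton from state s to the accept state 99
def pvSuf : Int → List (List Char)
  | 0 => [['i', 'f'], ['i', 'n'], ['i', 'm', 'p', 'o', 'r', 't'], ['i', 's'], ['F', 'a', 'l', 's', 'e'], ['d', 'e', 'f'], ['r', 'a', 'i', 's', 'e'], ['N', 'o', 'n', 'e'], ['c', 'o', 'n', 't', 'i', 'n', 'u', 'e'], ['c', 'l', 'a', 's', 's'], ['f', 'o', 'r'], ['f', 'r', 'o', 'm'], ['T', 'r', 'u', 'e'], ['w', 'h', 'i', 'l', 'e'], ['w', 'i', 't', 'h'], ['a', 's'], ['n', 'o', 't'], ['e', 'l', 'i', 'f'], ['e', 'l', 'i', 'n'], ['e', 'l', 'i', 'm', 'p', 'o', 'r', 't'], ['e', 'l', 'i', 's'], ['e', 'l', 's', 'e'], ['o', 'r'], ['p', 'a', 's', 's'], ['b', 'r', 'e', 'a', 'k']]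
  | 1 => [['f'], ['n'], ['m', 'p', 'o', 'r', 't'], ['s']]
  | 2 => [['p', 'o', 'r', 't']]
  | 3 => [['o', 'r', 't']]
  | 4 => [['r', 't']]
  | 5 => [['t']]
  | 6 => [['a', 'l', 's', 'e']]
  | 7 => [['l', 's', 'e']]
  | 8 => [['s', 'e']]
  | 9 => [['e']]
  | 10 => [['e', 'f']]
  | 11 => [['f']]
  | 12 => [['e', 't', 'u', 'r', 'n']]
  | 13 => [['t', 'u', 'r', 'n']]
  | 14 => [['u', 'r', 'n']]
  | 15 => [['r', 'n']]
  | 16 => [['n']]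
  | 17 => [['o', 'n', 'e']]
  | 18 => [['n', 'e']]
  | 19 => [['e']]
  | 20 => [['o', 'n', 't', 'i', 'n', 'u', 'e'], ['l', 'a', 's', 's']]
  | 21 => [['n', 't', 'i', 'n', 'u', 'e']]
  | 22 => [['t', 'i', 'n', 'u', 'e']]
  | 23 => [['i', 'n', 'u', 'e']]
  | 24 => [['n', 'u', 'e']]
  | 25 => [['u', 'e']]
  | 26 => [['e']]
  | 27 => [['o', 'r'], ['r', 'o', 'm']]
  | 28 => [['r']]
  | 29 => [['r', 'u', 'e']]
  | 30 => [['u', 'e']]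
  | 31 => [['e']]
  | 32 => [['a', 's', 's']]
  | 33 => [['s', 's']]
  | 34 => [['s']]
  | 35 => [['o', 'm']]
  | 36 => [['m']]
  | 37 => [['h', 'i', 'l', 'e'], ['i', 't', 'h']]
  | 38 => [['i', 'l', 'e']]
  | 39 => [['l', 'e']]
  | 40 => [['e']]
  | 41 => [['n', 'd']]
  | 42 => [['d']]
  | 43 => [['o', 't']]
  | 44 => [['t']]
  | 45 => [['t', 'h']]
  | 46 => [['h']]
  | 47 => [['s']]
  | 48 => [['l', 'i', 'f'], ['l', 'i', 'n'], ['l', 'i', 'm', 'p', 'o', 'r', 't'], ['l', 'i', 's'], ['l', 's', 'e']]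
  | 49 => [['i', 'f'], ['i', 'n'], ['i', 'm', 'p', 'o', 'r', 't'], ['i', 's'], ['s', 'e']]
  | 50 => [['e']]
  | 51 => [['r']]
  | 52 => [['a', 's', 's']]
  | 53 => [['s', 's']]
  | 54 => [['s']]
  | 55 => [['r', 'e', 'a', 'k']]
  | 56 => [['e', 'a', 'k']]
  | 57 => [['a', 'k']]
  | 58 => [['k']]
  | 59 => [['a', 'i', 's', 'e']]
  | 60 => [['i', 's', 'e']]
  | 61 => [['s', 'e']]
  | 62 => [['e']]
  | 99 => [[]]
  | 100 => []
  | _ => []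

theorem pvSufEq0 : pvSuf 0 = [['i', 'f'], ['i', 'n'], ['i', 'm', 'p', 'o', 'r', 't'], ['i', 's'], ['F', 'a', 'l', 's', 'e'], ['d', 'e', 'f'], ['r', 'a', 'i', 's', 'e'], ['N', 'o', 'n', 'e'], ['c', 'o', 'n', 't', 'i', 'n', 'u', 'e'], ['c', 'l', 'a', 's', 's'], ['f', 'o', 'r'], ['f', 'r', 'o', 'm'], ['T', 'r', 'u', 'e'], ['w', 'h', 'i', 'l', 'e'], ['w', 'i', 't', 'h'], ['a', 's'], ['n', 'o', 't'], ['e', 'l', 'i', 'f'], ['e', 'l', 'i', 'n'], ['e', 'l', 'i', 'm', 'p', 'o', 'r', 't'], ['e', 'l', 'i', 's'], ['e', 'l', 's', 'e'], ['o', 'r'], ['p', 'a', 's', 's'], ['b', 'r', 'e', 'a', 'k']] := rfl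
theorem pvSufEq1 : pvSuf 1 = [['f'], ['n'], ['m', 'p', 'o', 'r', 't'], ['s']] := rfl
theorem pvSufEq2 : pvSuf 2 = [['p', 'o', 'r', 't']] := rfl
theorem pvSufEq3 : pvSuf 3 = [['o', 'r', 't']] := rfl
theorem pvSufEq4 : pvSuf 4 = [['r', 't']] := rfl
theorem pvSufEq5 : pvSuf 5 = [['t']] := rfl
theorem pvSufEq6 : pvSuf 6 = [['a', 'l', 's', 'e']] := rfl
theorem pvSufEq7 : pvSuf 7 = [['l', 's', 'e']] := rfl
theorem pvSufEq8 : pvSuf 8 = [['s', 'e']] := rfl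
theorem pvSufEq9 : pvSuf 9 = [['e']] := rfl
theorem pvSufEq10 : pvSuf 10 = [['e', 'f']] := rfl
theorem pvSufEq11 : pvSuf 11 = [['f']] := rfl
theorem pvSufEq12 : pvSuf 12 = [['e', 't', 'u', 'r', 'n']] := rfl
theorem pvSufEq13 : pvSuf 13 = [['t', 'u', 'r', 'n']] := rfl
theorem pvSufEq14 : pvSuf 14 = [['u', 'r', 'n']] := rfl
theorem pvSufEq15 : pvSuf 15 = [['r', 'n']] := rfl
theorem pvSufEq16 : pvSuf 16 = [['n']] := rfl
theorem pvSufEq17 : pvSuf 17 = [['o', 'n', 'e']] := rfl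
theorem pvSufEq18 : pvSuf 18 = [['n', 'e']] := rfl
theorem pvSufEq19 : pvSuf 19 = [['e']] := rfl
theorem pvSufEq20 : pvSuf 20 = [['o', 'n', 't', 'i', 'n', 'u', 'e'], ['l', 'a', 's', 's']] := rfl
theorem pvSufEq21 : pvSuf 21 = [['n', 't', 'i', 'n', 'u', 'e']] := rfl
theorem pvSufEq22 : pvSuf 22 = [['t', 'i', 'n', 'u', 'e']] := rfl
theorem pvSufEq23 : pvSuf 23 = [['i', 'n', 'u', 'e']] := rfl
theorem pvSufEq24 : pvSuf 24 = [['n', 'u', 'e']] := rfl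
theorem pvSufEq25 : pvSuf 25 = [['u', 'e']] := rfl
theorem pvSufEq26 : pvSuf 26 = [['e']] := rfl
theorem pvSufEq27 : pvSuf 27 = [['o', 'r'], ['r', 'o', 'm']] := rfl
theorem pvSufEq28 : pvSuf 28 = [['r']] := rfl
theorem pvSufEq29 : pvSuf 29 = [['r', 'u', 'e']] := rfl
theorem pvSufEq30 : pvSuf 30 = [['u', 'e']] := rfl
theorem pvSufEq31 : pvSuf 31 = [['e']] := rfl
theorem pvSufEq32 : pvSuf 32 = [['a', 's', 's']] := rfl
theorem pvSufEq33 : pvSuf 33 = [['s', 's']] := rfl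
theorem pvSufEq34 : pvSuf 34 = [['s']] := rfl
theorem pvSufEq35 : pvSuf 35 = [['o', 'm']] := rfl
theorem pvSufEq36 : pvSuf 36 = [['m']] := rfl
theorem pvSufEq37 : pvSuf 37 = [['h', 'i', 'l', 'e'], ['i', 't', 'h']] := rfl
theorem pvSufEq38 : pvSuf 38 = [['i', 'l', 'e']] := rfl
theorem pvSufEq39 : pvSuf 39 = [['l', 'e']] := rfl
theorem pvSufEq40 : pvSuf 40 = [['e']] := rfl
theorem pvSufEq41 : pvSuf 41 = [['n', 'd']] := rfl
theorem pvSufEq42 : pvSuf 42 = [['d']] := rfl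
theorem pvSufEq43 : pvSuf 43 = [['o', 't']] := rfl
theorem pvSufEq44 : pvSuf 44 = [['t']] := rfl
theorem pvSufEq45 : pvSuf 45 = [['t', 'h']] := rfl
theorem pvSufEq46 : pvSuf 46 = [['h']] := rfl
theorem pvSufEq47 : pvSuf 47 = [['s']] := rfl
theorem pvSufEq48 : pvSuf 48 = [['l', 'i', 'f'], ['l', 'i', 'n'], ['l', 'i', 'm', 'p', 'o', 'r', 't'], ['l', 'i', 's'], ['l', 's', 'e']] := rfl
theorem pvSufEq49 : pvSuf 49 = [['i', 'f'], ['i', 'n'], ['i', 'm', 'p', 'o', 'r', 't'], ['i', 's'], ['s', 'e']] := rfl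
theorem pvSufEq50 : pvSuf 50 = [['e']] := rfl
theorem pvSufEq51 : pvSuf 51 = [['r']] := rfl
theorem pvSufEq52 : pvSuf 52 = [['a', 's', 's']] := rfl
theorem pvSufEq53 : pvSuf 53 = [['s', 's']] := rfl
theorem pvSufEq54 : pvSuf 54 = [['s']] := rfl
theorem pvSufEq55 : pvSuf 55 = [['r', 'e', 'a', 'k']] := rfl
theorem pvSufEq56 : pvSuf 56 = [['e', 'a', 'k']] := rfl
theorem pvSufEq57 : pvSuf 57 = [['a', 'k']] := rfl
theorem pvSufEq58 : pvSuf 58 = [['k']] := rfl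
theorem pvSufEq59 : pvSuf 59 = [['a', 'i', 's', 'e']] := rfl
theorem pvSufEq60 : pvSuf 60 = [['i', 's', 'e']] := rfl
theorem pvSufEq61 : pvSuf 61 = [['s', 'e']] := rfl
theorem pvSufEq62 : pvSuf 62 = [['e']] := rfl
theorem pvSufEq99 : pvSuf 99 = [[]] := rfl
theorem pvSufEq100 : pvSuf 100 = [] := rfl

theorem pvStep_0 (c : Char) : pvStepA 0 c = (if c = 'i' then 1 else if c = 'F' then 6 else if c = 'd' then 10 else if c = 'r' then 59 else if c = 'N' then 17 else if c = 'c' then 20 else if c = 'f' then 27 else if c = 'T' then 29 else if c = 'w' then 37 else if c = 'a' then 47 else if c = 'n' then 43 else if c = 'e' then 48 else if c = 'o' then 51 else if c = 'p' then 52 else if c = 'b' then 55 else 100) := by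
  by_cases h1 : c = 'i'
  · subst h1; decide
  by_cases h2 : c = 'F'
  · subst h2; decide
  by_cases h3 : c = 'd'
  · subst h3; decide
  by_cases h4 : c = 'r'
  · subst h4; decide
  by_cases h5 : c = 'N'
  · subst h5; decide
  by_cases h6 : c = 'c'
  · subst h6; decide
  by_cases h7 : c = 'f'
  · subst h7; decide
  by_cases h8 : c = 'T'
  · subst h8; decide
  by_cases h9 : c = 'w'
  · subst h9; decide
  by_cases h10 : c = 'a'
  · subst h10; decide
  by_cases h11 : c = 'n'
  · subst h11; decide
  by_cases h12 : c = 'e'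
  · subst h12; decide
  by_cases h13 : c = 'o'
  · subst h13; decide
  by_cases h14 : c = 'p'
  · subst h14; decide
  by_cases h15 : c = 'b'
  · subst h15; decide
  · simp only [h1, h2, h3, h4, h5, h6, h7, h8, h9, h10, h11, h12, h13, h14, h15, if_false]
    unfold pvStepA pvInner
    rw [show (pvTrans.getD 0 PySem.Dict.empty).keys = ["i", "F", "d", "r", "N", "c", "f", "T", "w", "a", "n", "e", "o", "p", "b"] from rfl]
    simp [List.find?, show ("i" : String).toList = ['i'] from rfl, show ("F" : String).toList = ['F'] from rfl, show ("d" : String).toList = ['d'] from rfl, show ("r" : String).toList = ['r'] from rfl, show ("N" : String).toList = ['N'] from rfl, show ("c" : String).toList = ['c'] from rfl, show ("f" : String).toList = ['f'] from rfl, show ("T" : String).toList = ['T'] from rfl, show ("w" : String).toList = ['w'] from rfl, show ("a" : String).toList = ['a'] from rfl, show ("n" : String).toList = ['n'] from rfl, show ("e" : String).toList = ['e'] from rfl, show ("o" : String).toList = ['o'] from rfl, show ("p" : String).toList = ['p'] from rfl, show ("b" : String).toList = ['b'] from rfl, h1, h2, h3, h4, h5, h6, h7, h8, h9, h10, h11,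 h12, h13, h14, h15]

theorem pvStep_1 (c : Char) : pvStepA 1 c = (if c = 'f' then 99 else if c = 'n' then 99 else if c = 'm' then 2 else if c = 's' then 99 else 100) := by
  by_cases h1 : c = 'f'
  · subst h1; decide
  by_cases h2 : c = 'n'
  · subst h2; decide
  by_cases h3 : c = 'm'
  · subst h3; decide
  by_cases h4 : c = 's'
  · subst h4; decide
  · simp only [h1, h2, h3, h4, if_false]
    unfold pvStepA pvInner
    rw [show (pvTrans.getD 1 PySem.Dict.empty).keys = ["f", "n", "m", "s"] from rfl]
    simp [List.find?, show ("f" : String).toList = ['f'] from rfl, show ("n" : String).toList = ['n'] from rfl, show ("m" : String).toList = ['m'] from rfl, show ("s" : String).toList = ['s'] from rfl, h1, h2, h3, h4]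

theorem pvStep_2 (c : Char) : pvStepA 2 c = (if c = 'p' then 3 else 100) := by
  by_cases h1 : c = 'p'
  · subst h1; decide
  · simp only [h1, if_false]
    unfold pvStepA pvInner
    rw [show (pvTrans.getD 2 PySem.Dict.empty).keys = ["p"] from rfl]
    simp [List.find?, show ("p" : String).toList = ['p'] from rfl, h1]

theorem pvStep_3 (c : Char) : pvStepA 3 c = (if c = 'o' then 4 else 100) := by
  by_cases h1 : c = 'o'
  · subst h1; decide
  · simp only [h1, if_false]
    unfold pvStepA pvInner
    rw [show (pvTrans.getD 3 PySem.Dict.empty).keys = ["o"] from rfl]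
    simp [List.find?, show ("o" : String).toList = ['o'] from rfl, h1]

theorem pvStep_4 (c : Char) : pvStepA 4 c = (if c = 'r' then 5 else 100) := by
  by_cases h1 : c = 'r'
  · subst h1; decide
  · simp only [h1, if_false]
    unfold pvStepA pvInner
    rw [show (pvTrans.getD 4 PySem.Dict.empty).keys = ["r"] from rfl]
    simp [List.find?, show ("r" : String).toList = ['r'] from rfl, h1]

theorem pvStep_5 (c : Char) : pvStepA 5 c = (if c = 't' then 99 else 100) := by
  by_cases h1 : c = 't'
  · subst h1; decide
  · simp only [h1, if_false]
    unfold pvStepA pvInner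
    rw [show (pvTrans.getD 5 PySem.Dict.empty).keys = ["t"] from rfl]
    simp [List.find?, show ("t" : String).toList = ['t'] from rfl, h1]

theorem pvStep_6 (c : Char) : pvStepA 6 c = (if c = 'a' then 7 else 100) := by
  by_cases h1 : c = 'a'
  · subst h1; decide
  · simp only [h1, if_false]
    unfold pvStepA pvInner
    rw [show (pvTrans.getD 6 PySem.Dict.empty).keys = ["a"] from rfl]
    simp [List.find?, show ("a" : String).toList = ['a'] from rfl, h1]

theorem pvStep_7 (c : Char) : pvStepA 7 c = (if c = 'l' then 8 else 100) := by
  by_cases h1 : c = 'l'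
  · subst h1; decide
  · simp only [h1, if_false]
    unfold pvStepA pvInner
    rw [show (pvTrans.getD 7 PySem.Dict.empty).keys = ["l"] from rfl]
    simp [List.find?, show ("l" : String).toList = ['l'] from rfl, h1]

theorem pvStep_8 (c : Char) : pvStepA 8 c = (if c = 's' then 9 else 100) := by
  by_cases h1 : c = 's'
  · subst h1; decide
  · simp only [h1, if_false]
    unfold pvStepA pvInner
    rw [show (pvTrans.getD 8 PySem.Dict.empty).keys = ["s"] from rfl]
    simp [List.find?, show ("s" : String).toList = ['s'] from rfl, h1]

theorem pvStep_9 (c : Char) : pvStepA 9 c = (if c = 'e' then 99 else 100) := by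
  by_cases h1 : c = 'e'
  · subst h1; decide
  · simp only [h1, if_false]
    unfold pvStepA pvInner
    rw [show (pvTrans.getD 9 PySem.Dict.empty).keys = ["e"] from rfl]
    simp [List.find?, show ("e" : String).toList = ['e'] from rfl, h1]

theorem pvStep_10 (c : Char) : pvStepA 10 c = (if c = 'e' then 11 else 100) := by
  by_cases h1 : c = 'e'
  · subst h1; decide
  · simp only [h1, if_false]
    unfold pvStepA pvInner
    rw [show (pvTrans.getD 10 PySem.Dict.empty).keys = ["e"] from rfl]
    simp [List.find?, show ("e" : String).toList = ['e'] from rfl, h1]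

theorem pvStep_11 (c : Char) : pvStepA 11 c = (if c = 'f' then 99 else 100) := by
  by_cases h1 : c = 'f'
  · subst h1; decide
  · simp only [h1, if_false]
    unfold pvStepA pvInner
    rw [show (pvTrans.getD 11 PySem.Dict.empty).keys = ["f"] from rfl]
    simp [List.find?, show ("f" : String).toList = ['f'] from rfl, h1]

theorem pvStep_12 (c : Char) : pvStepA 12 c = (if c = 'e' then 13 else 100) := by
  by_cases h1 : c = 'e'
  · subst h1; decide
  · simp only [h1, if_false]
    unfold pvStepA pvInner
    rw [show (pvTrans.getD 12 PySem.Dict.empty).keys = ["e"] from rfl]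
    simp [List.find?, show ("e" : String).toList = ['e'] from rfl, h1]

theorem pvStep_13 (c : Char) : pvStepA 13 c = (if c = 't' then 14 else 100) := by
  by_cases h1 : c = 't'
  · subst h1; decide
  · simp only [h1, if_false]
    unfold pvStepA pvInner
    rw [show (pvTrans.getD 13 PySem.Dict.empty).keys = ["t"] from rfl]
    simp [List.find?, show ("t" : String).toList = ['t'] from rfl, h1]

theorem pvStep_14 (c : Char) : pvStepA 14 c = (if c = 'u' then 15 else 100) := by
  by_cases h1 : c = 'u'
  · subst h1; decide
  · simp only [h1, if_false]
    unfold pvStepA pvInner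
    rw [show (pvTrans.getD 14 PySem.Dict.empty).keys = ["u"] from rfl]
    simp [List.find?, show ("u" : String).toList = ['u'] from rfl, h1]

theorem pvStep_15 (c : Char) : pvStepA 15 c = (if c = 'r' then 16 else 100) := by
  by_cases h1 : c = 'r'
  · subst h1; decide
  · simp only [h1, if_false]
    unfold pvStepA pvInner
    rw [show (pvTrans.getD 15 PySem.Dict.empty).keys = ["r"] from rfl]
    simp [List.find?, show ("r" : String).toList = ['r'] from rfl, h1]

theorem pvStep_16 (c : Char) : pvStepA 16 c = (if c = 'n' then 99 else 100) := by
  by_cases h1 : c = 'n'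
  · subst h1; decide
  · simp only [h1, if_false]
    unfold pvStepA pvInner
    rw [show (pvTrans.getD 16 PySem.Dict.empty).keys = ["n"] from rfl]
    simp [List.find?, show ("n" : String).toList = ['n'] from rfl, h1]

theorem pvStep_17 (c : Char) : pvStepA 17 c = (if c = 'o' then 18 else 100) := by
  by_cases h1 : c = 'o'
  · subst h1; decide
  · simp only [h1, if_false]
    unfold pvStepA pvInner
    rw [show (pvTrans.getD 17 PySem.Dict.empty).keys = ["o"] from rfl]
    simp [List.find?, show ("o" : String).toList = ['o'] from rfl, h1]

theorem pvStep_18 (c : Char) : pvStepA 18 c = (if c = 'n' then 19 else 100) := by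
  by_cases h1 : c = 'n'
  · subst h1; decide
  · simp only [h1, if_false]
    unfold pvStepA pvInner
    rw [show (pvTrans.getD 18 PySem.Dict.empty).keys = ["n"] from rfl]
    simp [List.find?, show ("n" : String).toList = ['n'] from rfl, h1]

theorem pvStep_19 (c : Char) : pvStepA 19 c = (if c = 'e' then 99 else 100) := by
  by_cases h1 : c = 'e'
  · subst h1; decide
  · simp only [h1, if_false]
    unfold pvStepA pvInner
    rw [show (pvTrans.getD 19 PySem.Dict.empty).keys = ["e"] from rfl]
    simp [List.find?, show ("e" : String).toList = ['e'] from rfl, h1]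

theorem pvStep_20 (c : Char) : pvStepA 20 c = (if c = 'o' then 21 else if c = 'l' then 32 else 100) := by
  by_cases h1 : c = 'o'
  · subst h1; decide
  by_cases h2 : c = 'l'
  · subst h2; decide
  · simp only [h1, h2, if_false]
    unfold pvStepA pvInner
    rw [show (pvTrans.getD 20 PySem.Dict.empty).keys = ["o", "l"] from rfl]
    simp [List.find?, show ("o" : String).toList = ['o'] from rfl, show ("l" : String).toList = ['l'] from rfl, h1, h2]

theorem pvStep_21 (c : Char) : pvStepA 21 c = (if c = 'n' then 22 else 100) := by
  by_cases h1 : c = 'n'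
  · subst h1; decide
  · simp only [h1, if_false]
    unfold pvStepA pvInner
    rw [show (pvTrans.getD 21 PySem.Dict.empty).keys = ["n"] from rfl]
    simp [List.find?, show ("n" : String).toList = ['n'] from rfl, h1]

theorem pvStep_22 (c : Char) : pvStepA 22 c = (if c = 't' then 23 else 100) := by
  by_cases h1 : c = 't'
  · subst h1; decide
  · simp only [h1, if_false]
    unfold pvStepA pvInner
    rw [show (pvTrans.getD 22 PySem.Dict.empty).keys = ["t"] from rfl]
    simp [List.find?, show ("t" : String).toList = ['t'] from rfl, h1]

theorem pvStep_23 (c : Char) : pvStepA 23 c = (if c = 'i' then 24 else 100) := by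
  by_cases h1 : c = 'i'
  · subst h1; decide
  · simp only [h1, if_false]
    unfold pvStepA pvInner
    rw [show (pvTrans.getD 23 PySem.Dict.empty).keys = ["i"] from rfl]
    simp [List.find?, show ("i" : String).toList = ['i'] from rfl, h1]

theorem pvStep_24 (c : Char) : pvStepA 24 c = (if c = 'n' then 25 else 100) := by
  by_cases h1 : c = 'n'
  · subst h1; decide
  · simp only [h1, if_false]
    unfold pvStepA pvInner
    rw [show (pvTrans.getD 24 PySem.Dict.empty).keys = ["n"] from rfl]
    simp [List.find?, show ("n" : String).toList = ['n'] from rfl, h1]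

theorem pvStep_25 (c : Char) : pvStepA 25 c = (if c = 'u' then 26 else 100) := by
  by_cases h1 : c = 'u'
  · subst h1; decide
  · simp only [h1, if_false]
    unfold pvStepA pvInner
    rw [show (pvTrans.getD 25 PySem.Dict.empty).keys = ["u"] from rfl]
    simp [List.find?, show ("u" : String).toList = ['u'] from rfl, h1]

theorem pvStep_26 (c : Char) : pvStepA 26 c = (if c = 'e' then 99 else 100) := by
  by_cases h1 : c = 'e'
  · subst h1; decide
  · simp only [h1, if_false]
    unfold pvStepA pvInner
    rw [show (pvTrans.getD 26 PySem.Dict.empty).keys = ["e"] from rfl]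
    simp [List.find?, show ("e" : String).toList = ['e'] from rfl, h1]

theorem pvStep_27 (c : Char) : pvStepA 27 c = (if c = 'o' then 28 else if c = 'r' then 35 else 100) := by
  by_cases h1 : c = 'o'
  · subst h1; decide
  by_cases h2 : c = 'r'
  · subst h2; decide
  · simp only [h1, h2, if_false]
    unfold pvStepA pvInner
    rw [show (pvTrans.getD 27 PySem.Dict.empty).keys = ["o", "r"] from rfl]
    simp [List.find?, show ("o" : String).toList = ['o'] from rfl, show ("r" : String).toList = ['r'] from rfl, h1, h2]

theorem pvStep_28 (c : Char) : pvStepA 28 c = (if c = 'r' then 99 else 100) := by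
  by_cases h1 : c = 'r'
  · subst h1; decide
  · simp only [h1, if_false]
    unfold pvStepA pvInner
    rw [show (pvTrans.getD 28 PySem.Dict.empty).keys = ["r"] from rfl]
    simp [List.find?, show ("r" : String).toList = ['r'] from rfl, h1]

theorem pvStep_29 (c : Char) : pvStepA 29 c = (if c = 'r' then 30 else 100) := by
  by_cases h1 : c = 'r'
  · subst h1; decide
  · simp only [h1, if_false]
    unfold pvStepA pvInner
    rw [show (pvTrans.getD 29 PySem.Dict.empty).keys = ["r"] from rfl]
    simp [List.find?, show ("r" : String).toList = ['r'] from rfl, h1]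

theorem pvStep_30 (c : Char) : pvStepA 30 c = (if c = 'u' then 31 else 100) := by
  by_cases h1 : c = 'u'
  · subst h1; decide
  · simp only [h1, if_false]
    unfold pvStepA pvInner
    rw [show (pvTrans.getD 30 PySem.Dict.empty).keys = ["u"] from rfl]
    simp [List.find?, show ("u" : String).toList = ['u'] from rfl, h1]

theorem pvStep_31 (c : Char) : pvStepA 31 c = (if c = 'e' then 99 else 100) := by
  by_cases h1 : c = 'e'
  · subst h1; decide
  · simp only [h1, if_false]
    unfold pvStepA pvInner
    rw [show (pvTrans.getD 31 PySem.Dict.empty).keys = ["e"] from rfl]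
    simp [List.find?, show ("e" : String).toList = ['e'] from rfl, h1]

theorem pvStep_32 (c : Char) : pvStepA 32 c = (if c = 'a' then 33 else 100) := by
  by_cases h1 : c = 'a'
  · subst h1; decide
  · simp only [h1, if_false]
    unfold pvStepA pvInner
    rw [show (pvTrans.getD 32 PySem.Dict.empty).keys = ["a"] from rfl]
    simp [List.find?, show ("a" : String).toList = ['a'] from rfl, h1]

theorem pvStep_33 (c : Char) : pvStepA 33 c = (if c = 's' then 34 else 100) := by
  by_cases h1 : c = 's'
  · subst h1; decide
  · simp only [h1, if_false]
    unfold pvStepA pvInner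
    rw [show (pvTrans.getD 33 PySem.Dict.empty).keys = ["s"] from rfl]
    simp [List.find?, show ("s" : String).toList = ['s'] from rfl, h1]

theorem pvStep_34 (c : Char) : pvStepA 34 c = (if c = 's' then 99 else 100) := by
  by_cases h1 : c = 's'
  · subst h1; decide
  · simp only [h1, if_false]
    unfold pvStepA pvInner
    rw [show (pvTrans.getD 34 PySem.Dict.empty).keys = ["s"] from rfl]
    simp [List.find?, show ("s" : String).toList = ['s'] from rfl, h1]

theorem pvStep_35 (c : Char) : pvStepA 35 c = (if c = 'o' then 36 else 100) := by
  by_cases h1 : c = 'o'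
  · subst h1; decide
  · simp only [h1, if_false]
    unfold pvStepA pvInner
    rw [show (pvTrans.getD 35 PySem.Dict.empty).keys = ["o"] from rfl]
    simp [List.find?, show ("o" : String).toList = ['o'] from rfl, h1]

theorem pvStep_36 (c : Char) : pvStepA 36 c = (if c = 'm' then 99 else 100) := by
  by_cases h1 : c = 'm'
  · subst h1; decide
  · simp only [h1, if_false]
    unfold pvStepA pvInner
    rw [show (pvTrans.getD 36 PySem.Dict.empty).keys = ["m"] from rfl]
    simp [List.find?, show ("m" : String).toList = ['m'] from rfl, h1]

theorem pvStep_37 (c : Char) : pvStepA 37 c = (if c = 'h' then 38 else if c = 'i' then 45 else 100) := by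
  by_cases h1 : c = 'h'
  · subst h1; decide
  by_cases h2 : c = 'i'
  · subst h2; decide
  · simp only [h1, h2, if_false]
    unfold pvStepA pvInner
    rw [show (pvTrans.getD 37 PySem.Dict.empty).keys = ["h", "i"] from rfl]
    simp [List.find?, show ("h" : String).toList = ['h'] from rfl, show ("i" : String).toList = ['i'] from rfl, h1, h2]

theorem pvStep_38 (c : Char) : pvStepA 38 c = (if c = 'i' then 39 else 100) := by
  by_cases h1 : c = 'i'
  · subst h1; decide
  · simp only [h1, if_false]
    unfold pvStepA pvInner
    rw [show (pvTrans.getD 38 PySem.Dict.empty).keys = ["i"] from rfl]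
    simp [List.find?, show ("i" : String).toList = ['i'] from rfl, h1]

theorem pvStep_39 (c : Char) : pvStepA 39 c = (if c = 'l' then 40 else 100) := by
  by_cases h1 : c = 'l'
  · subst h1; decide
  · simp only [h1, if_false]
    unfold pvStepA pvInner
    rw [show (pvTrans.getD 39 PySem.Dict.empty).keys = ["l"] from rfl]
    simp [List.find?, show ("l" : String).toList = ['l'] from rfl, h1]

theorem pvStep_40 (c : Char) : pvStepA 40 c = (if c = 'e' then 99 else 100) := by
  by_cases h1 : c = 'e'
  · subst h1; decide
  · simp only [h1, if_false]
    unfold pvStepA pvInner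
    rw [show (pvTrans.getD 40 PySem.Dict.empty).keys = ["e"] from rfl]
    simp [List.find?, show ("e" : String).toList = ['e'] from rfl, h1]

theorem pvStep_41 (c : Char) : pvStepA 41 c = (if c = 'n' then 42 else 100) := by
  by_cases h1 : c = 'n'
  · subst h1; decide
  · simp only [h1, if_false]
    unfold pvStepA pvInner
    rw [show (pvTrans.getD 41 PySem.Dict.empty).keys = ["n"] from rfl]
    simp [List.find?, show ("n" : String).toList = ['n'] from rfl, h1]

theorem pvStep_42 (c : Char) : pvStepA 42 c = (if c = 'd' then 99 else 100) := by
  by_cases h1 : c = 'd'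
  · subst h1; decide
  · simp only [h1, if_false]
    unfold pvStepA pvInner
    rw [show (pvTrans.getD 42 PySem.Dict.empty).keys = ["d"] from rfl]
    simp [List.find?, show ("d" : String).toList = ['d'] from rfl, h1]

theorem pvStep_43 (c : Char) : pvStepA 43 c = (if c = 'o' then 44 else 100) := by
  by_cases h1 : c = 'o'
  · subst h1; decide
  · simp only [h1, if_false]
    unfold pvStepA pvInner
    rw [show (pvTrans.getD 43 PySem.Dict.empty).keys = ["o"] from rfl]
    simp [List.find?, show ("o" : String).toList = ['o'] from rfl, h1]

theorem pvStep_44 (c : Char) : pvStepA 44 c = (if c = 't' then 99 else 100) := by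
  by_cases h1 : c = 't'
  · subst h1; decide
  · simp only [h1, if_false]
    unfold pvStepA pvInner
    rw [show (pvTrans.getD 44 PySem.Dict.empty).keys = ["t"] from rfl]
    simp [List.find?, show ("t" : String).toList = ['t'] from rfl, h1]

theorem pvStep_45 (c : Char) : pvStepA 45 c = (if c = 't' then 46 else 100) := by
  by_cases h1 : c = 't'
  · subst h1; decide
  · simp only [h1, if_false]
    unfold pvStepA pvInner
    rw [show (pvTrans.getD 45 PySem.Dict.empty).keys = ["t"] from rfl]
    simp [List.find?, show ("t" : String).toList = ['t'] from rfl, h1]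

theorem pvStep_46 (c : Char) : pvStepA 46 c = (if c = 'h' then 99 else 100) := by
  by_cases h1 : c = 'h'
  · subst h1; decide
  · simp only [h1, if_false]
    unfold pvStepA pvInner
    rw [show (pvTrans.getD 46 PySem.Dict.empty).keys = ["h"] from rfl]
    simp [List.find?, show ("h" : String).toList = ['h'] from rfl, h1]

theorem pvStep_47 (c : Char) : pvStepA 47 c = (if c = 's' then 99 else 100) := by
  by_cases h1 : c = 's'
  · subst h1; decide
  · simp only [h1, if_false]
    unfold pvStepA pvInner
    rw [show (pvTrans.getD 47 PySem.Dict.empty).keys = ["s"] from rfl]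
    simp [List.find?, show ("s" : String).toList = ['s'] from rfl, h1]

theorem pvStep_48 (c : Char) : pvStepA 48 c = (if c = 'l' then 49 else 100) := by
  by_cases h1 : c = 'l'
  · subst h1; decide
  · simp only [h1, if_false]
    unfold pvStepA pvInner
    rw [show (pvTrans.getD 48 PySem.Dict.empty).keys = ["l"] from rfl]
    simp [List.find?, show ("l" : String).toList = ['l'] from rfl, h1]

theorem pvStep_49 (c : Char) : pvStepA 49 c = (if c = 'i' then 1 else if c = 's' then 50 else 100) := by
  by_cases h1 : c = 'i'
  · subst h1; decide
  by_cases h2 : c = 's'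
  · subst h2; decide
  · simp only [h1, h2, if_false]
    unfold pvStepA pvInner
    rw [show (pvTrans.getD 49 PySem.Dict.empty).keys = ["i", "s"] from rfl]
    simp [List.find?, show ("i" : String).toList = ['i'] from rfl, show ("s" : String).toList = ['s'] from rfl, h1, h2]

theorem pvStep_50 (c : Char) : pvStepA 50 c = (if c = 'e' then 99 else 100) := by
  by_cases h1 : c = 'e'
  · subst h1; decide
  · simp only [h1, if_false]
    unfold pvStepA pvInner
    rw [show (pvTrans.getD 50 PySem.Dict.empty).keys = ["e"] from rfl]
    simp [List.find?, show ("e" : String).toList = ['e'] from rfl, h1]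

theorem pvStep_51 (c : Char) : pvStepA 51 c = (if c = 'r' then 99 else 100) := by
  by_cases h1 : c = 'r'
  · subst h1; decide
  · simp only [h1, if_false]
    unfold pvStepA pvInner
    rw [show (pvTrans.getD 51 PySem.Dict.empty).keys = ["r"] from rfl]
    simp [List.find?, show ("r" : String).toList = ['r'] from rfl, h1]

theorem pvStep_52 (c : Char) : pvStepA 52 c = (if c = 'a' then 53 else 100) := by
  by_cases h1 : c = 'a'
  · subst h1; decide
  · simp only [h1, if_false]
    unfold pvStepA pvInner
    rw [show (pvTrans.getD 52 PySem.Dict.empty).keys = ["a"] from rfl]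
    simp [List.find?, show ("a" : String).toList = ['a'] from rfl, h1]

theorem pvStep_53 (c : Char) : pvStepA 53 c = (if c = 's' then 54 else 100) := by
  by_cases h1 : c = 's'
  · subst h1; decide
  · simp only [h1, if_false]
    unfold pvStepA pvInner
    rw [show (pvTrans.getD 53 PySem.Dict.empty).keys = ["s"] from rfl]
    simp [List.find?, show ("s" : String).toList = ['s'] from rfl, h1]

theorem pvStep_54 (c : Char) : pvStepA 54 c = (if c = 's' then 99 else 100) := by
  by_cases h1 : c = 's'
  · subst h1; decide
  · simp only [h1, if_false]
    unfold pvStepA pvInner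
    rw [show (pvTrans.getD 54 PySem.Dict.empty).keys = ["s"] from rfl]
    simp [List.find?, show ("s" : String).toList = ['s'] from rfl, h1]

theorem pvStep_55 (c : Char) : pvStepA 55 c = (if c = 'r' then 56 else 100) := by
  by_cases h1 : c = 'r'
  · subst h1; decide
  · simp only [h1, if_false]
    unfold pvStepA pvInner
    rw [show (pvTrans.getD 55 PySem.Dict.empty).keys = ["r"] from rfl]
    simp [List.find?, show ("r" : String).toList = ['r'] from rfl, h1]

theorem pvStep_56 (c : Char) : pvStepA 56 c = (if c = 'e' then 57 else 100) := by
  by_cases h1 : c = 'e'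
  · subst h1; decide
  · simp only [h1, if_false]
    unfold pvStepA pvInner
    rw [show (pvTrans.getD 56 PySem.Dict.empty).keys = ["e"] from rfl]
    simp [List.find?, show ("e" : String).toList = ['e'] from rfl, h1]

theorem pvStep_57 (c : Char) : pvStepA 57 c = (if c = 'a' then 58 else 100) := by
  by_cases h1 : c = 'a'
  · subst h1; decide
  · simp only [h1, if_false]
    unfold pvStepA pvInner
    rw [show (pvTrans.getD 57 PySem.Dict.empty).keys = ["a"] from rfl]
    simp [List.find?, show ("a" : String).toList = ['a'] from rfl, h1]

theorem pvStep_58 (c : Char) : pvStepA 58 c = (if c = 'k' then 99 else 100) := by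
  by_cases h1 : c = 'k'
  · subst h1; decide
  · simp only [h1, if_false]
    unfold pvStepA pvInner
    rw [show (pvTrans.getD 58 PySem.Dict.empty).keys = ["k"] from rfl]
    simp [List.find?, show ("k" : String).toList = ['k'] from rfl, h1]

theorem pvStep_59 (c : Char) : pvStepA 59 c = (if c = 'a' then 60 else 100) := by
  by_cases h1 : c = 'a'
  · subst h1; decide
  · simp only [h1, if_false]
    unfold pvStepA pvInner
    rw [show (pvTrans.getD 59 PySem.Dict.empty).keys = ["a"] from rfl]
    simp [List.find?, show ("a" : String).toList = ['a'] from rfl, h1]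

theorem pvStep_60 (c : Char) : pvStepA 60 c = (if c = 'i' then 61 else 100) := by
  by_cases h1 : c = 'i'
  · subst h1; decide
  · simp only [h1, if_false]
    unfold pvStepA pvInner
    rw [show (pvTrans.getD 60 PySem.Dict.empty).keys = ["i"] from rfl]
    simp [List.find?, show ("i" : String).toList = ['i'] from rfl, h1]

theorem pvStep_61 (c : Char) : pvStepA 61 c = (if c = 's' then 62 else 100) := by
  by_cases h1 : c = 's'
  · subst h1; decide
  · simp only [h1, if_false]
    unfold pvStepA pvInner
    rw [show (pvTrans.getD 61 PySem.Dict.empty).keys = ["s"] from rfl]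
    simp [List.find?, show ("s" : String).toList = ['s'] from rfl, h1]

theorem pvStep_62 (c : Char) : pvStepA 62 c = (if c = 'e' then 99 else 100) := by
  by_cases h1 : c = 'e'
  · subst h1; decide
  · simp only [h1, if_false]
    unfold pvStepA pvInner
    rw [show (pvTrans.getD 62 PySem.Dict.empty).keys = ["e"] from rfl]
    simp [List.find?, show ("e" : String).toList = ['e'] from rfl, h1]

theorem pvStep_99 (c : Char) : pvStepA 99 c = 100 := by
  unfold pvStepA pvInner
  rcases hf : ((pvTrans.getD 99 PySem.Dict.empty).keys.find? (fun k => k.toList.contains c)) with _ | k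
  · simp only [hf]
  · have hk := List.mem_of_find?_eq_some hf
    rw [show (pvTrans.getD 99 PySem.Dict.empty).keys = ["abcdefghijklmnopqrstuvwxyzABCDEFGHIJKLMNOPQRSTUVWXYZ_1234567890"] from rfl] at hk
    simp only [List.mem_cons, List.not_mem_nil, or_false] at hk
    subst hk; simp only [hf]; decide

theorem pvStep_100 (c : Char) : pvStepA 100 c = 100 := by
  unfold pvStepA pvInner
  rcases hf : ((pvTrans.getD 100 PySem.Dict.empty).keys.find? (fun k => k.toList.contains c)) with _ | k
  · simp only [hf]
  · have hk := List.mem_of_find?_eq_some hf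
    rw [show (pvTrans.getD 100 PySem.Dict.empty).keys = ["abcdefghijklmnopqrstuvwxyzABCDEFGHIJKLMNOPQRSTUVWXYZ_1234567890"] from rfl] at hk
    simp only [List.mem_cons, List.not_mem_nil, or_false] at hk
    subst hk; simp only [hf]; decide

theorem pvClosed : ∀ s ∈ pvStates, ∀ (c : Char), pvStepA s c ∈ pvStates := by
  intro s hs c
  simp only [pvStates, List.mem_cons, List.not_mem_nil, or_false] at hs
  rcases hs with rfl|rfl|rfl|rfl|rfl|rfl|rfl|rfl|rfl|rfl|rfl|rfl|rfl|rfl|rfl|rfl|rfl|rfl|rfl|rfl|rfl|rfl|rfl|rfl|rfl|rfl|rfl|rfl|rfl|rfl|rfl|rfl|rfl|rfl|rfl|rfl|rfl|rfl|rfl|rfl|rfl|rfl|rfl|rfl|rfl|rfl|rfl|rfl|rfl|rfl|rfl|rfl|rfl|rfl|rfl|rfl|rfl|rfl|rfl|rfl|rfl|rfl|rfl|rfl|rfl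
  · rw [pvStep_0 c]
    by_cases h1 : c = 'i'
    · rw [if_pos h1]; decide
    rw [if_neg h1]
    by_cases h2 : c = 'F'
    · rw [if_pos h2]; decide
    rw [if_neg h2]
    by_cases h3 : c = 'd'
    · rw [if_pos h3]; decide
    rw [if_neg h3]
    by_cases h4 : c = 'r'
    · rw [if_pos h4]; decide
    rw [if_neg h4]
    by_cases h5 : c = 'N'
    · rw [if_pos h5]; decide
    rw [if_neg h5]
    by_cases h6 : c = 'c'
    · rw [if_pos h6]; decide
    rw [if_neg h6]
    by_cases h7 : c = 'f'
    · rw [if_pos h7]; decide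
    rw [if_neg h7]
    by_cases h8 : c = 'T'
    · rw [if_pos h8]; decide
    rw [if_neg h8]
    by_cases h9 : c = 'w'
    · rw [if_pos h9]; decide
    rw [if_neg h9]
    by_cases h10 : c = 'a'
    · rw [if_pos h10]; decide
    rw [if_neg h10]
    by_cases h11 : c = 'n'
    · rw [if_pos h11]; decide
    rw [if_neg h11]
    by_cases h12 : c = 'e'
    · rw [if_pos h12]; decide
    rw [if_neg h12]
    by_cases h13 : c = 'o'
    · rw [if_pos h13]; decide
    rw [if_neg h13]
    by_cases h14 : c = 'p'
    · rw [if_pos h14]; decide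
    rw [if_neg h14]
    by_cases h15 : c = 'b'
    · rw [if_pos h15]; decide
    rw [if_neg h15]
    decide
  · rw [pvStep_1 c]
    by_cases h1 : c = 'f'
    · rw [if_pos h1]; decide
    rw [if_neg h1]
    by_cases h2 : c = 'n'
    · rw [if_pos h2]; decide
    rw [if_neg h2]
    by_cases h3 : c = 'm'
    · rw [if_pos h3]; decide
    rw [if_neg h3]
    by_cases h4 : c = 's'
    · rw [if_pos h4]; decide
    rw [if_neg h4]
    decide
  · rw [pvStep_2 c]
    by_cases h1 : c = 'p'
    · rw [if_pos h1]; decide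
    rw [if_neg h1]
    decide
  · rw [pvStep_3 c]
    by_cases h1 : c = 'o'
    · rw [if_pos h1]; decide
    rw [if_neg h1]
    decide
  · rw [pvStep_4 c]
    by_cases h1 : c = 'r'
    · rw [if_pos h1]; decide
    rw [if_neg h1]
    decide
  · rw [pvStep_5 c]
    by_cases h1 : c = 't'
    · rw [if_pos h1]; decide
    rw [if_neg h1]
    decide
  · rw [pvStep_6 c]
    by_cases h1 : c = 'a'
    · rw [if_pos h1]; decide
    rw [if_neg h1]
    decide
  · rw [pvStep_7 c]
    by_cases h1 : c = 'l'
    · rw [if_pos h1]; decide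
    rw [if_neg h1]
    decide
  · rw [pvStep_8 c]
    by_cases h1 : c = 's'
    · rw [if_pos h1]; decide
    rw [if_neg h1]
    decide
  · rw [pvStep_9 c]
    by_cases h1 : c = 'e'
    · rw [if_pos h1]; decide
    rw [if_neg h1]
    decide
  · rw [pvStep_10 c]
    by_cases h1 : c = 'e'
    · rw [if_pos h1]; decide
    rw [if_neg h1]
    decide
  · rw [pvStep_11 c]
    by_cases h1 : c = 'f'
    · rw [if_pos h1]; decide
    rw [if_neg h1]
    decide
  · rw [pvStep_12 c]
    by_cases h1 : c = 'e'
    · rw [if_pos h1]; decide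
    rw [if_neg h1]
    decide
  · rw [pvStep_13 c]
    by_cases h1 : c = 't'
    · rw [if_pos h1]; decide
    rw [if_neg h1]
    decide
  · rw [pvStep_14 c]
    by_cases h1 : c = 'u'
    · rw [if_pos h1]; decide
    rw [if_neg h1]
    decide
  · rw [pvStep_15 c]
    by_cases h1 : c = 'r'
    · rw [if_pos h1]; decide
    rw [if_neg h1]
    decide
  · rw [pvStep_16 c]
    by_cases h1 : c = 'n'
    · rw [if_pos h1]; decide
    rw [if_neg h1]
    decide
  · rw [pvStep_17 c]
    by_cases h1 : c = 'o'
    · rw [if_pos h1]; decide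
    rw [if_neg h1]
    decide
  · rw [pvStep_18 c]
    by_cases h1 : c = 'n'
    · rw [if_pos h1]; decide
    rw [if_neg h1]
    decide
  · rw [pvStep_19 c]
    by_cases h1 : c = 'e'
    · rw [if_pos h1]; decide
    rw [if_neg h1]
    decide
  · rw [pvStep_20 c]
    by_cases h1 : c = 'o'
    · rw [if_pos h1]; decide
    rw [if_neg h1]
    by_cases h2 : c = 'l'
    · rw [if_pos h2]; decide
    rw [if_neg h2]
    decide
  · rw [pvStep_21 c]
    by_cases h1 : c = 'n'
    · rw [if_pos h1]; decide
    rw [if_neg h1]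
    decide
  · rw [pvStep_22 c]
    by_cases h1 : c = 't'
    · rw [if_pos h1]; decide
    rw [if_neg h1]
    decide
  · rw [pvStep_23 c]
    by_cases h1 : c = 'i'
    · rw [if_pos h1]; decide
    rw [if_neg h1]
    decide
  · rw [pvStep_24 c]
    by_cases h1 : c = 'n'
    · rw [if_pos h1]; decide
    rw [if_neg h1]
    decide
  · rw [pvStep_25 c]
    by_cases h1 : c = 'u'
    · rw [if_pos h1]; decide
    rw [if_neg h1]
    decide
  · rw [pvStep_26 c]
    by_cases h1 : c = 'e'
    · rw [if_pos h1]; decide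
    rw [if_neg h1]
    decide
  · rw [pvStep_27 c]
    by_cases h1 : c = 'o'
    · rw [if_pos h1]; decide
    rw [if_neg h1]
    by_cases h2 : c = 'r'
    · rw [if_pos h2]; decide
    rw [if_neg h2]
    decide
  · rw [pvStep_28 c]
    by_cases h1 : c = 'r'
    · rw [if_pos h1]; decide
    rw [if_neg h1]
    decide
  · rw [pvStep_29 c]
    by_cases h1 : c = 'r'
    · rw [if_pos h1]; decide
    rw [if_neg h1]
    decide
  · rw [pvStep_30 c]
    by_cases h1 : c = 'u'
    · rw [if_pos h1]; decide
    rw [if_neg h1]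
    decide
  · rw [pvStep_31 c]
    by_cases h1 : c = 'e'
    · rw [if_pos h1]; decide
    rw [if_neg h1]
    decide
  · rw [pvStep_32 c]
    by_cases h1 : c = 'a'
    · rw [if_pos h1]; decide
    rw [if_neg h1]
    decide
  · rw [pvStep_33 c]
    by_cases h1 : c = 's'
    · rw [if_pos h1]; decide
    rw [if_neg h1]
    decide
  · rw [pvStep_34 c]
    by_cases h1 : c = 's'
    · rw [if_pos h1]; decide
    rw [if_neg h1]
    decide
  · rw [pvStep_35 c]
    by_cases h1 : c = 'o'
    · rw [if_pos h1]; decide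
    rw [if_neg h1]
    decide
  · rw [pvStep_36 c]
    by_cases h1 : c = 'm'
    · rw [if_pos h1]; decide
    rw [if_neg h1]
    decide
  · rw [pvStep_37 c]
    by_cases h1 : c = 'h'
    · rw [if_pos h1]; decide
    rw [if_neg h1]
    by_cases h2 : c = 'i'
    · rw [if_pos h2]; decide
    rw [if_neg h2]
    decide
  · rw [pvStep_38 c]
    by_cases h1 : c = 'i'
    · rw [if_pos h1]; decide
    rw [if_neg h1]
    decide
  · rw [pvStep_39 c]
    by_cases h1 : c = 'l'
    · rw [if_pos h1]; decide
    rw [if_neg h1]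
    decide
  · rw [pvStep_40 c]
    by_cases h1 : c = 'e'
    · rw [if_pos h1]; decide
    rw [if_neg h1]
    decide
  · rw [pvStep_41 c]
    by_cases h1 : c = 'n'
    · rw [if_pos h1]; decide
    rw [if_neg h1]
    decide
  · rw [pvStep_42 c]
    by_cases h1 : c = 'd'
    · rw [if_pos h1]; decide
    rw [if_neg h1]
    decide
  · rw [pvStep_43 c]
    by_cases h1 : c = 'o'
    · rw [if_pos h1]; decide
    rw [if_neg h1]
    decide
  · rw [pvStep_44 c]
    by_cases h1 : c = 't'
    · rw [if_pos h1]; decide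
    rw [if_neg h1]
    decide
  · rw [pvStep_45 c]
    by_cases h1 : c = 't'
    · rw [if_pos h1]; decide
    rw [if_neg h1]
    decide
  · rw [pvStep_46 c]
    by_cases h1 : c = 'h'
    · rw [if_pos h1]; decide
    rw [if_neg h1]
    decide
  · rw [pvStep_47 c]
    by_cases h1 : c = 's'
    · rw [if_pos h1]; decide
    rw [if_neg h1]
    decide
  · rw [pvStep_48 c]
    by_cases h1 : c = 'l'
    · rw [if_pos h1]; decide
    rw [if_neg h1]
    decide
  · rw [pvStep_49 c]
    by_cases h1 : c = 'i'
    · rw [if_pos h1]; decide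
    rw [if_neg h1]
    by_cases h2 : c = 's'
    · rw [if_pos h2]; decide
    rw [if_neg h2]
    decide
  · rw [pvStep_50 c]
    by_cases h1 : c = 'e'
    · rw [if_pos h1]; decide
    rw [if_neg h1]
    decide
  · rw [pvStep_51 c]
    by_cases h1 : c = 'r'
    · rw [if_pos h1]; decide
    rw [if_neg h1]
    decide
  · rw [pvStep_52 c]
    by_cases h1 : c = 'a'
    · rw [if_pos h1]; decide
    rw [if_neg h1]
    decide
  · rw [pvStep_53 c]
    by_cases h1 : c = 's'
    · rw [if_pos h1]; decide
    rw [if_neg h1]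
    decide
  · rw [pvStep_54 c]
    by_cases h1 : c = 's'
    · rw [if_pos h1]; decide
    rw [if_neg h1]
    decide
  · rw [pvStep_55 c]
    by_cases h1 : c = 'r'
    · rw [if_pos h1]; decide
    rw [if_neg h1]
    decide
  · rw [pvStep_56 c]
    by_cases h1 : c = 'e'
    · rw [if_pos h1]; decide
    rw [if_neg h1]
    decide
  · rw [pvStep_57 c]
    by_cases h1 : c = 'a'
    · rw [if_pos h1]; decide
    rw [if_neg h1]
    decide
  · rw [pvStep_58 c]
    by_cases h1 : c = 'k'
    · rw [if_pos h1]; decide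
    rw [if_neg h1]
    decide
  · rw [pvStep_59 c]
    by_cases h1 : c = 'a'
    · rw [if_pos h1]; decide
    rw [if_neg h1]
    decide
  · rw [pvStep_60 c]
    by_cases h1 : c = 'i'
    · rw [if_pos h1]; decide
    rw [if_neg h1]
    decide
  · rw [pvStep_61 c]
    by_cases h1 : c = 's'
    · rw [if_pos h1]; decide
    rw [if_neg h1]
    decide
  · rw [pvStep_62 c]
    by_cases h1 : c = 'e'
    · rw [if_pos h1]; decide
    rw [if_neg h1]
    decide
  · rw [pvStep_99 c]; decide
  · rw [pvStep_100 c]; decide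

theorem pvStepSuf : ∀ s ∈ pvStates, ∀ (c : Char) (l : List Char), ((c :: l) ∈ pvSuf s ↔ l ∈ pvSuf (pvStepA s c)) := by
  intro s hs c l
  simp only [pvStates, List.mem_cons, List.not_mem_nil, or_false] at hs
  rcases hs with rfl|rfl|rfl|rfl|rfl|rfl|rfl|rfl|rfl|rfl|rfl|rfl|rfl|rfl|rfl|rfl|rfl|rfl|rfl|rfl|rfl|rfl|rfl|rfl|rfl|rfl|rfl|rfl|rfl|rfl|rfl|rfl|rfl|rfl|rfl|rfl|rfl|rfl|rfl|rfl|rfl|rfl|rfl|rfl|rfl|rfl|rfl|rfl|rfl|rfl|rfl|rfl|rfl|rfl|rfl|rfl|rfl|rfl|rfl|rfl|rfl|rfl|rfl|rfl|rfl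
  · rw [pvStep_0 c]
    by_cases h1 : c = 'i'
    · subst h1; rw [if_pos rfl]; simp [pvSufEq0, pvSufEq1]
    rw [if_neg h1]
    by_cases h2 : c = 'F'
    · subst h2; rw [if_pos rfl]; simp [pvSufEq0, pvSufEq6]
    rw [if_neg h2]
    by_cases h3 : c = 'd'
    · subst h3; rw [if_pos rfl]; simp [pvSufEq0, pvSufEq10]
    rw [if_neg h3]
    by_cases h4 : c = 'r'
    · subst h4; rw [if_pos rfl]; simp [pvSufEq0, pvSufEq59]
    rw [if_neg h4]
    by_cases h5 : c = 'N'
    · subst h5; rw [if_pos rfl]; simp [pvSufEq0, pvSufEq17]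
    rw [if_neg h5]
    by_cases h6 : c = 'c'
    · subst h6; rw [if_pos rfl]; simp [pvSufEq0, pvSufEq20]
    rw [if_neg h6]
    by_cases h7 : c = 'f'
    · subst h7; rw [if_pos rfl]; simp [pvSufEq0, pvSufEq27]
    rw [if_neg h7]
    by_cases h8 : c = 'T'
    · subst h8; rw [if_pos rfl]; simp [pvSufEq0, pvSufEq29]
    rw [if_neg h8]
    by_cases h9 : c = 'w'
    · subst h9; rw [if_pos rfl]; simp [pvSufEq0, pvSufEq37]
    rw [if_neg h9]
    by_cases h10 : c = 'a'
    · subst h10; rw [if_pos rfl]; simp [pvSufEq0, pvSufEq47]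
    rw [if_neg h10]
    by_cases h11 : c = 'n'
    · subst h11; rw [if_pos rfl]; simp [pvSufEq0, pvSufEq43]
    rw [if_neg h11]
    by_cases h12 : c = 'e'
    · subst h12; rw [if_pos rfl]; simp [pvSufEq0, pvSufEq48]
    rw [if_neg h12]
    by_cases h13 : c = 'o'
    · subst h13; rw [if_pos rfl]; simp [pvSufEq0, pvSufEq51]
    rw [if_neg h13]
    by_cases h14 : c = 'p'
    · subst h14; rw [if_pos rfl]; simp [pvSufEq0, pvSufEq52]
    rw [if_neg h14]
    by_cases h15 : c = 'b'
    · subst h15; rw [if_pos rfl]; simp [pvSufEq0, pvSufEq55]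
    rw [if_neg h15]
    simp [pvSufEq0, pvSufEq100, h1, h2, h3, h4, h5, h6, h7, h8, h9, h10, h11, h12, h13, h14, h15]
  · rw [pvStep_1 c]
    by_cases h1 : c = 'f'
    · subst h1; rw [if_pos rfl]; simp [pvSufEq1, pvSufEq99]
    rw [if_neg h1]
    by_cases h2 : c = 'n'
    · subst h2; rw [if_pos rfl]; simp [pvSufEq1, pvSufEq99]
    rw [if_neg h2]
    by_cases h3 : c = 'm'
    · subst h3; rw [if_pos rfl]; simp [pvSufEq1, pvSufEq2]
    rw [if_neg h3]
    by_cases h4 : c = 's'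
    · subst h4; rw [if_pos rfl]; simp [pvSufEq1, pvSufEq99]
    rw [if_neg h4]
    simp [pvSufEq1, pvSufEq100, h1, h2, h3, h4]
  · rw [pvStep_2 c]
    by_cases h1 : c = 'p'
    · subst h1; rw [if_pos rfl]; simp [pvSufEq2, pvSufEq3]
    rw [if_neg h1]
    simp [pvSufEq2, pvSufEq100, h1]
  · rw [pvStep_3 c]
    by_cases h1 : c = 'o'
    · subst h1; rw [if_pos rfl]; simp [pvSufEq3, pvSufEq4]
    rw [if_neg h1]
    simp [pvSufEq3, pvSufEq100, h1]
  · rw [pvStep_4 c]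
    by_cases h1 : c = 'r'
    · subst h1; rw [if_pos rfl]; simp [pvSufEq4, pvSufEq5]
    rw [if_neg h1]
    simp [pvSufEq4, pvSufEq100, h1]
  · rw [pvStep_5 c]
    by_cases h1 : c = 't'
    · subst h1; rw [if_pos rfl]; simp [pvSufEq5, pvSufEq99]
    rw [if_neg h1]
    simp [pvSufEq5, pvSufEq100, h1]
  · rw [pvStep_6 c]
    by_cases h1 : c = 'a'
    · subst h1; rw [if_pos rfl]; simp [pvSufEq6, pvSufEq7]
    rw [if_neg h1]
    simp [pvSufEq6, pvSufEq100, h1]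
  · rw [pvStep_7 c]
    by_cases h1 : c = 'l'
    · subst h1; rw [if_pos rfl]; simp [pvSufEq7, pvSufEq8]
    rw [if_neg h1]
    simp [pvSufEq7, pvSufEq100, h1]
  · rw [pvStep_8 c]
    by_cases h1 : c = 's'
    · subst h1; rw [if_pos rfl]; simp [pvSufEq8, pvSufEq9]
    rw [if_neg h1]
    simp [pvSufEq8, pvSufEq100, h1]
  · rw [pvStep_9 c]
    by_cases h1 : c = 'e'
    · subst h1; rw [if_pos rfl]; simp [pvSufEq9, pvSufEq99]
    rw [if_neg h1]
    simp [pvSufEq9, pvSufEq100, h1]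
  · rw [pvStep_10 c]
    by_cases h1 : c = 'e'
    · subst h1; rw [if_pos rfl]; simp [pvSufEq10, pvSufEq11]
    rw [if_neg h1]
    simp [pvSufEq10, pvSufEq100, h1]
  · rw [pvStep_11 c]
    by_cases h1 : c = 'f'
    · subst h1; rw [if_pos rfl]; simp [pvSufEq11, pvSufEq99]
    rw [if_neg h1]
    simp [pvSufEq11, pvSufEq100, h1]
  · rw [pvStep_12 c]
    by_cases h1 : c = 'e'
    · subst h1; rw [if_pos rfl]; simp [pvSufEq12, pvSufEq13]
    rw [if_neg h1]
    simp [pvSufEq12, pvSufEq100, h1]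
  · rw [pvStep_13 c]
    by_cases h1 : c = 't'
    · subst h1; rw [if_pos rfl]; simp [pvSufEq13, pvSufEq14]
    rw [if_neg h1]
    simp [pvSufEq13, pvSufEq100, h1]
  · rw [pvStep_14 c]
    by_cases h1 : c = 'u'
    · subst h1; rw [if_pos rfl]; simp [pvSufEq14, pvSufEq15]
    rw [if_neg h1]
    simp [pvSufEq14, pvSufEq100, h1]
  · rw [pvStep_15 c]
    by_cases h1 : c = 'r'
    · subst h1; rw [if_pos rfl]; simp [pvSufEq15, pvSufEq16]
    rw [if_neg h1]
    simp [pvSufEq15, pvSufEq100, h1]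
  · rw [pvStep_16 c]
    by_cases h1 : c = 'n'
    · subst h1; rw [if_pos rfl]; simp [pvSufEq16, pvSufEq99]
    rw [if_neg h1]
    simp [pvSufEq16, pvSufEq100, h1]
  · rw [pvStep_17 c]
    by_cases h1 : c = 'o'
    · subst h1; rw [if_pos rfl]; simp [pvSufEq17, pvSufEq18]
    rw [if_neg h1]
    simp [pvSufEq17, pvSufEq100, h1]
  · rw [pvStep_18 c]
    by_cases h1 : c = 'n'
    · subst h1; rw [if_pos rfl]; simp [pvSufEq18, pvSufEq19]
    rw [if_neg h1]
    simp [pvSufEq18, pvSufEq100, h1]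
  · rw [pvStep_19 c]
    by_cases h1 : c = 'e'
    · subst h1; rw [if_pos rfl]; simp [pvSufEq19, pvSufEq99]
    rw [if_neg h1]
    simp [pvSufEq19, pvSufEq100, h1]
  · rw [pvStep_20 c]
    by_cases h1 : c = 'o'
    · subst h1; rw [if_pos rfl]; simp [pvSufEq20, pvSufEq21]
    rw [if_neg h1]
    by_cases h2 : c = 'l'
    · subst h2; rw [if_pos rfl]; simp [pvSufEq20, pvSufEq32]
    rw [if_neg h2]
    simp [pvSufEq20, pvSufEq100, h1, h2]
  · rw [pvStep_21 c]
    by_cases h1 : c = 'n'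
    · subst h1; rw [if_pos rfl]; simp [pvSufEq21, pvSufEq22]
    rw [if_neg h1]
    simp [pvSufEq21, pvSufEq100, h1]
  · rw [pvStep_22 c]
    by_cases h1 : c = 't'
    · subst h1; rw [if_pos rfl]; simp [pvSufEq22, pvSufEq23]
    rw [if_neg h1]
    simp [pvSufEq22, pvSufEq100, h1]
  · rw [pvStep_23 c]
    by_cases h1 : c = 'i'
    · subst h1; rw [if_pos rfl]; simp [pvSufEq23, pvSufEq24]
    rw [if_neg h1]
    simp [pvSufEq23, pvSufEq100, h1]
  · rw [pvStep_24 c]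
    by_cases h1 : c = 'n'
    · subst h1; rw [if_pos rfl]; simp [pvSufEq24, pvSufEq25]
    rw [if_neg h1]
    simp [pvSufEq24, pvSufEq100, h1]
  · rw [pvStep_25 c]
    by_cases h1 : c = 'u'
    · subst h1; rw [if_pos rfl]; simp [pvSufEq25, pvSufEq26]
    rw [if_neg h1]
    simp [pvSufEq25, pvSufEq100, h1]
  · rw [pvStep_26 c]
    by_cases h1 : c = 'e'
    · subst h1; rw [if_pos rfl]; simp [pvSufEq26, pvSufEq99]
    rw [if_neg h1]
    simp [pvSufEq26, pvSufEq100, h1]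
  · rw [pvStep_27 c]
    by_cases h1 : c = 'o'
    · subst h1; rw [if_pos rfl]; simp [pvSufEq27, pvSufEq28]
    rw [if_neg h1]
    by_cases h2 : c = 'r'
    · subst h2; rw [if_pos rfl]; simp [pvSufEq27, pvSufEq35]
    rw [if_neg h2]
    simp [pvSufEq27, pvSufEq100, h1, h2]
  · rw [pvStep_28 c]
    by_cases h1 : c = 'r'
    · subst h1; rw [if_pos rfl]; simp [pvSufEq28, pvSufEq99]
    rw [if_neg h1]
    simp [pvSufEq28, pvSufEq100, h1]
  · rw [pvStep_29 c]
    by_cases h1 : c = 'r'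
    · subst h1; rw [if_pos rfl]; simp [pvSufEq29, pvSufEq30]
    rw [if_neg h1]
    simp [pvSufEq29, pvSufEq100, h1]
  · rw [pvStep_30 c]
    by_cases h1 : c = 'u'
    · subst h1; rw [if_pos rfl]; simp [pvSufEq30, pvSufEq31]
    rw [if_neg h1]
    simp [pvSufEq30, pvSufEq100, h1]
  · rw [pvStep_31 c]
    by_cases h1 : c = 'e'
    · subst h1; rw [if_pos rfl]; simp [pvSufEq31, pvSufEq99]
    rw [if_neg h1]
    simp [pvSufEq31, pvSufEq100, h1]
  · rw [pvStep_32 c]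
    by_cases h1 : c = 'a'
    · subst h1; rw [if_pos rfl]; simp [pvSufEq32, pvSufEq33]
    rw [if_neg h1]
    simp [pvSufEq32, pvSufEq100, h1]
  · rw [pvStep_33 c]
    by_cases h1 : c = 's'
    · subst h1; rw [if_pos rfl]; simp [pvSufEq33, pvSufEq34]
    rw [if_neg h1]
    simp [pvSufEq33, pvSufEq100, h1]
  · rw [pvStep_34 c]
    by_cases h1 : c = 's'
    · subst h1; rw [if_pos rfl]; simp [pvSufEq34, pvSufEq99]
    rw [if_neg h1]
    simp [pvSufEq34, pvSufEq100, h1]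
  · rw [pvStep_35 c]
    by_cases h1 : c = 'o'
    · subst h1; rw [if_pos rfl]; simp [pvSufEq35, pvSufEq36]
    rw [if_neg h1]
    simp [pvSufEq35, pvSufEq100, h1]
  · rw [pvStep_36 c]
    by_cases h1 : c = 'm'
    · subst h1; rw [if_pos rfl]; simp [pvSufEq36, pvSufEq99]
    rw [if_neg h1]
    simp [pvSufEq36, pvSufEq100, h1]
  · rw [pvStep_37 c]
    by_cases h1 : c = 'h'
    · subst h1; rw [if_pos rfl]; simp [pvSufEq37, pvSufEq38]
    rw [if_neg h1]
    by_cases h2 : c = 'i'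
    · subst h2; rw [if_pos rfl]; simp [pvSufEq37, pvSufEq45]
    rw [if_neg h2]
    simp [pvSufEq37, pvSufEq100, h1, h2]
  · rw [pvStep_38 c]
    by_cases h1 : c = 'i'
    · subst h1; rw [if_pos rfl]; simp [pvSufEq38, pvSufEq39]
    rw [if_neg h1]
    simp [pvSufEq38, pvSufEq100, h1]
  · rw [pvStep_39 c]
    by_cases h1 : c = 'l'
    · subst h1; rw [if_pos rfl]; simp [pvSufEq39, pvSufEq40]
    rw [if_neg h1]
    simp [pvSufEq39, pvSufEq100, h1]
  · rw [pvStep_40 c]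
    by_cases h1 : c = 'e'
    · subst h1; rw [if_pos rfl]; simp [pvSufEq40, pvSufEq99]
    rw [if_neg h1]
    simp [pvSufEq40, pvSufEq100, h1]
  · rw [pvStep_41 c]
    by_cases h1 : c = 'n'
    · subst h1; rw [if_pos rfl]; simp [pvSufEq41, pvSufEq42]
    rw [if_neg h1]
    simp [pvSufEq41, pvSufEq100, h1]
  · rw [pvStep_42 c]
    by_cases h1 : c = 'd'
    · subst h1; rw [if_pos rfl]; simp [pvSufEq42, pvSufEq99]
    rw [if_neg h1]
    simp [pvSufEq42, pvSufEq100, h1]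
  · rw [pvStep_43 c]
    by_cases h1 : c = 'o'
    · subst h1; rw [if_pos rfl]; simp [pvSufEq43, pvSufEq44]
    rw [if_neg h1]
    simp [pvSufEq43, pvSufEq100, h1]
  · rw [pvStep_44 c]
    by_cases h1 : c = 't'
    · subst h1; rw [if_pos rfl]; simp [pvSufEq44, pvSufEq99]
    rw [if_neg h1]
    simp [pvSufEq44, pvSufEq100, h1]
  · rw [pvStep_45 c]
    by_cases h1 : c = 't'
    · subst h1; rw [if_pos rfl]; simp [pvSufEq45, pvSufEq46]
    rw [if_neg h1]
    simp [pvSufEq45, pvSufEq100, h1]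
  · rw [pvStep_46 c]
    by_cases h1 : c = 'h'
    · subst h1; rw [if_pos rfl]; simp [pvSufEq46, pvSufEq99]
    rw [if_neg h1]
    simp [pvSufEq46, pvSufEq100, h1]
  · rw [pvStep_47 c]
    by_cases h1 : c = 's'
    · subst h1; rw [if_pos rfl]; simp [pvSufEq47, pvSufEq99]
    rw [if_neg h1]
    simp [pvSufEq47, pvSufEq100, h1]
  · rw [pvStep_48 c]
    by_cases h1 : c = 'l'
    · subst h1; rw [if_pos rfl]; simp [pvSufEq48, pvSufEq49]
    rw [if_neg h1]
    simp [pvSufEq48, pvSufEq100, h1]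
  · rw [pvStep_49 c]
    by_cases h1 : c = 'i'
    · subst h1; rw [if_pos rfl]; simp [pvSufEq49, pvSufEq1]
    rw [if_neg h1]
    by_cases h2 : c = 's'
    · subst h2; rw [if_pos rfl]; simp [pvSufEq49, pvSufEq50]
    rw [if_neg h2]
    simp [pvSufEq49, pvSufEq100, h1, h2]
  · rw [pvStep_50 c]
    by_cases h1 : c = 'e'
    · subst h1; rw [if_pos rfl]; simp [pvSufEq50, pvSufEq99]
    rw [if_neg h1]
    simp [pvSufEq50, pvSufEq100, h1]
  · rw [pvStep_51 c]
    by_cases h1 : c = 'r'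
    · subst h1; rw [if_pos rfl]; simp [pvSufEq51, pvSufEq99]
    rw [if_neg h1]
    simp [pvSufEq51, pvSufEq100, h1]
  · rw [pvStep_52 c]
    by_cases h1 : c = 'a'
    · subst h1; rw [if_pos rfl]; simp [pvSufEq52, pvSufEq53]
    rw [if_neg h1]
    simp [pvSufEq52, pvSufEq100, h1]
  · rw [pvStep_53 c]
    by_cases h1 : c = 's'
    · subst h1; rw [if_pos rfl]; simp [pvSufEq53, pvSufEq54]
    rw [if_neg h1]
    simp [pvSufEq53, pvSufEq100, h1]
  · rw [pvStep_54 c]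
    by_cases h1 : c = 's'
    · subst h1; rw [if_pos rfl]; simp [pvSufEq54, pvSufEq99]
    rw [if_neg h1]
    simp [pvSufEq54, pvSufEq100, h1]
  · rw [pvStep_55 c]
    by_cases h1 : c = 'r'
    · subst h1; rw [if_pos rfl]; simp [pvSufEq55, pvSufEq56]
    rw [if_neg h1]
    simp [pvSufEq55, pvSufEq100, h1]
  · rw [pvStep_56 c]
    by_cases h1 : c = 'e'
    · subst h1; rw [if_pos rfl]; simp [pvSufEq56, pvSufEq57]
    rw [if_neg h1]
    simp [pvSufEq56, pvSufEq100, h1]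
  · rw [pvStep_57 c]
    by_cases h1 : c = 'a'
    · subst h1; rw [if_pos rfl]; simp [pvSufEq57, pvSufEq58]
    rw [if_neg h1]
    simp [pvSufEq57, pvSufEq100, h1]
  · rw [pvStep_58 c]
    by_cases h1 : c = 'k'
    · subst h1; rw [if_pos rfl]; simp [pvSufEq58, pvSufEq99]
    rw [if_neg h1]
    simp [pvSufEq58, pvSufEq100, h1]
  · rw [pvStep_59 c]
    by_cases h1 : c = 'a'
    · subst h1; rw [if_pos rfl]; simp [pvSufEq59, pvSufEq60]
    rw [if_neg h1]
    simp [pvSufEq59, pvSufEq100, h1]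
  · rw [pvStep_60 c]
    by_cases h1 : c = 'i'
    · subst h1; rw [if_pos rfl]; simp [pvSufEq60, pvSufEq61]
    rw [if_neg h1]
    simp [pvSufEq60, pvSufEq100, h1]
  · rw [pvStep_61 c]
    by_cases h1 : c = 's'
    · subst h1; rw [if_pos rfl]; simp [pvSufEq61, pvSufEq62]
    rw [if_neg h1]
    simp [pvSufEq61, pvSufEq100, h1]
  · rw [pvStep_62 c]
    by_cases h1 : c = 'e'
    · subst h1; rw [if_pos rfl]; simp [pvSufEq62, pvSufEq99]
    rw [if_neg h1]
    simp [pvSufEq62, pvSufEq100, h1]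
  · rw [pvStep_99 c]; simp [pvSufEq99, pvSufEq100]
  · rw [pvStep_100 c]; simp [pvSufEq100, pvSufEq100]

theorem pvMain : ∀ (l : List Char), ∀ s ∈ pvStates, (l.foldl pvStepA s = 99 ↔ l ∈ pvSuf s) := by
  intro l
  induction l with
  | nil =>
    intro s hs
    simp only [pvStates, List.mem_cons, List.not_mem_nil, or_false] at hs
    rcases hs with rfl|rfl|rfl|rfl|rfl|rfl|rfl|rfl|rfl|rfl|rfl|rfl|rfl|rfl|rfl|rfl|rfl|rfl|rfl|rfl|rfl|rfl|rfl|rfl|rfl|rfl|rfl|rfl|rfl|rfl|rfl|rfl|rfl|rfl|rfl|rfl|rfl|rfl|rfl|rfl|rfl|rfl|rfl|rfl|rfl|rfl|rfl|rfl|rfl|rfl|rfl|rfl|rfl|rfl|rfl|rfl|rfl|rfl|rfl|rfl|rfl|rfl|rfl|rfl|rfl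
    all_goals decide
  | cons c l ih =>
    intro s hs
    rw [List.foldl_cons]
    exact (ih (pvStepA s c) (pvClosed s hs c)).trans (pvStepSuf s hs c l).symm

-- A's result, characterised through the accepted language of the automaton
theorem pvA_char (v : String) : reserved_word_check v = !(decide (v.toList ∈ pvSuf 0)) := by
  by_cases hm : v.toList ∈ pvSuf 0
  · have h99 : v.toList.foldl pvStepA 0 = 99 := (pvMain v.toList 0 (by decide)).mpr hm
    show (!((PySem.Set.ofList [(99 : Int)]).contains (v.toList.foldl pvStepA 0)))
        = (!(decide (v.toList ∈ pvSuf 0)))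
    rw [h99]
    simp [hm]
  · have h99 : v.toList.foldl pvStepA 0 ≠ 99 := fun h => hm ((pvMain v.toList 0 (by decide)).mp h)
    show (!((PySem.Set.ofList [(99 : Int)]).contains (v.toList.foldl pvStepA 0)))
        = (!(decide (v.toList ∈ pvSuf 0)))
    rw [show (PySem.Set.ofList [(99 : Int)]) = ([99] : List Int) from by decide]
    simp [PySem.Set.contains_eq_listContains, List.contains_eq_mem, h99, hm]

-- B's result as plain membership
theorem pvB_char (v : String) :
    reserved_word_check_alt v = !(decide (v ∈ (["if", "in", "is", "import", "False", "True", "def", "return", "None", "continue", "for", "class", "from", "while", "and", "not", "with", "as", "elif", "else", "or", "pass", "break", "raise"] : List String))) := by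
  have h : pvReserved = (["if", "in", "is", "import", "False", "True", "def", "return", "None", "continue", "for", "class", "from", "while", "and", "not", "with", "as", "elif", "else", "or", "pass", "break", "raise"] : List String) := by decide
  simp [reserved_word_check_alt, h, PySem.Set.contains_eq_listContains, List.contains_eq_mem]

-- outside the five exceptional words the two accepted sets agree
theorem pvBridge (v : String) (hD : ¬ D_reserved_word_check v) :
    (v.toList ∈ pvSuf 0) ↔ v ∈ (["if", "in", "is", "import", "False", "True", "def", "return", "None", "continue", "for", "class", "from", "while", "and", "not", "with", "as", "elif", "else", "or", "pass", "break", "raise"] : List String) := by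
  unfold D_reserved_word_check at hD
  constructor
  · intro h
    rw [pvSufEq0] at h
    simp only [List.mem_cons, List.not_mem_nil, or_false] at h
    rcases h with h|h|h|h|h|h|h|h|h|h|h|h|h|h|h|h|h|h|h|h|h|h|h|h|h
    · have hv : v = "if" := String.toList_inj.mp (show v.toList = ("if" : String).toList from h); rw [hv]; decide
    · have hv : v = "in" := String.toList_inj.mp (show v.toList = ("in" : String).toList from h); rw [hv]; decide
    · have hv : v = "import" := String.toList_inj.mp (show v.toList = ("import" : String).toList from h); rw [hv]; decide
    · have hv : v = "is" := String.toList_inj.mp (show v.toList = ("is" : String).toList from h); rw [hv]; decide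
    · have hv : v = "False" := String.toList_inj.mp (show v.toList = ("False" : String).toList from h); rw [hv]; decide
    · have hv : v = "def" := String.toList_inj.mp (show v.toList = ("def" : String).toList from h); rw [hv]; decide
    · have hv : v = "raise" := String.toList_inj.mp (show v.toList = ("raise" : String).toList from h); rw [hv]; decide
    · have hv : v = "None" := String.toList_inj.mp (show v.toList = ("None" : String).toList from h); rw [hv]; decide
    · have hv : v = "continue" := String.toList_inj.mp (show v.toList = ("continue" : String).toList from h); rw [hv]; decide
    · have hv : v = "class" := String.toList_inj.mp (show v.toList = ("class" : String).toList from h); rw [hv]; decide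
    · have hv : v = "for" := String.toList_inj.mp (show v.toList = ("for" : String).toList from h); rw [hv]; decide
    · have hv : v = "from" := String.toList_inj.mp (show v.toList = ("from" : String).toList from h); rw [hv]; decide
    · have hv : v = "True" := String.toList_inj.mp (show v.toList = ("True" : String).toList from h); rw [hv]; decide
    · have hv : v = "while" := String.toList_inj.mp (show v.toList = ("while" : String).toList from h); rw [hv]; decide
    · have hv : v = "with" := String.toList_inj.mp (show v.toList = ("with" : String).toList from h); rw [hv]; decide
    · have hv : v = "as" := String.toList_inj.mp (show v.toList = ("as" : String).toList from h); rw [hv]; decide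
    · have hv : v = "not" := String.toList_inj.mp (show v.toList = ("not" : String).toList from h); rw [hv]; decide
    · have hv : v = "elif" := String.toList_inj.mp (show v.toList = ("elif" : String).toList from h); rw [hv]; decide
    · have hv : v = "elin" := String.toList_inj.mp (show v.toList = ("elin" : String).toList from h); exact absurd (by rw [hv]; decide) hD
    · have hv : v = "elimport" := String.toList_inj.mp (show v.toList = ("elimport" : String).toList from h); exact absurd (by rw [hv]; decide) hD
    · have hv : v = "elis" := String.toList_inj.mp (show v.toList = ("elis" : String).toList from h); exact absurd (by rw [hv]; decide) hD
    · have hv : v = "else" := String.toList_inj.mp (show v.toList = ("else" : String).toList from h); rw [hv]; decide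
    · have hv : v = "or" := String.toList_inj.mp (show v.toList = ("or" : String).toList from h); rw [hv]; decide
    · have hv : v = "pass" := String.toList_inj.mp (show v.toList = ("pass" : String).toList from h); rw [hv]; decide
    · have hv : v = "break" := String.toList_inj.mp (show v.toList = ("break" : String).toList from h); rw [hv]; decide
  · intro h
    simp only [List.mem_cons, List.not_mem_nil, or_false] at h
    rcases h with rfl|rfl|rfl|rfl|rfl|rfl|rfl|rfl|rfl|rfl|rfl|rfl|rfl|rfl|rfl|rfl|rfl|rfl|rfl|rfl|rfl|rfl|rfl|rfl
    · decide
    · decide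
    · decide
    · decide
    · decide
    · decide
    · decide
    · exact absurd (by decide) hD
    · decide
    · decide
    · decide
    · decide
    · decide
    · decide
    · exact absurd (by decide) hD
    · decide
    · decide
    · decide
    · decide
    · decide
    · decide
    · decide
    · decide
    · decide

-- ===== VERDICT (by name: the statement is the Claim_ definition above) =====
theorem reserved_word_check_spec : Claim_unchanged_reserved_word_check := by
  intro v _hDom
  unfold Spec_reserved_word_check
  intro hD
  rw [pvA_char, pvB_char]
  congr 1
  simp only [decide_eq_decide]
  exact pvBridge v hD

theorem reserved_word_check_changed : Claim_changed_reserved_word_check := by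
  unfold Claim_changed_reserved_word_check
  refine ⟨by decide, by decide, by decide, by decide, by decide⟩

theorem reserved_word_check_tight : Claim_exact_reserved_word_check := by
  intro v _hDom hD
  unfold D_reserved_word_check at hD
  rcases hD with rfl|rfl|rfl|rfl|rfl <;> decide
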